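-- pv_equiv track=rewrite | github.com/skvcool-rgb/KOS-Organism | kos/grid_primitives.py | extract_smallest_object
-- ===== SOURCE A (Python) =====
-- from typing import Any, Callable, Dict, List, Tuple
--
-- Grid = List[List[int]]
--
-- def grid_copy(g: Grid) -> Grid:
--     return [row[:] for row in g]
--
-- def _find_objects(g: Grid) -> List[List[Tuple[int, int]]]:
--     if not g or not g[0]: return []
--     r, c = len(g), len(g[0])
--     visited = [[False] * c for _ in range(r)]
--     objects = []
--
--     def bfs(si, sj):
--         q = [(si, sj)]
--         visited[si][sj] = True
--         cells = []
--         color = g[si][sj]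
--         while q:
--             i, j = q.pop(0)
--             cells.append((i, j))
--             for di, dj in [(-1, 0), (1, 0), (0, -1), (0, 1)]:
--                 ni, nj = i + di, j + dj
--                 if 0 <= ni < r and 0 <= nj < c and not visited[ni][nj] and g[ni][nj] == color:
--                     visited[ni][nj] = True
--                     q.append((ni, nj))
--         return cells
--
--     for i in range(r):
--         for j in range(c):
--             if not visited[i][j] and g[i][j] != 0:
--                 obj = bfs(i, j)
--                 if obj:
--                     objects.append(obj)
--     return objects
--
-- def extract_smallest_object(g: Grid) -> Grid:
--     objects = _find_objects(g)
--     if not objects: return grid_copy(g)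
--     smallest = min(objects, key=len)
--     rows = [p[0] for p in smallest]
--     cols = [p[1] for p in smallest]
--     out = [[0] * (max(cols) - min(cols) + 1) for _ in range(max(rows) - min(rows) + 1)]
--     for i, j in smallest:
--         out[i - min(rows)][j - min(cols)] = g[i][j]
--     return out
-- ===== SOURCE B (Python) =====
-- def extract_smallest_object(g):
--     if not g or not g[0]:
--         return [row[:] for row in g]
--     r, c = len(g), len(g[0])
--     n = r * c
--     parent = list(range(n))
--
--     def find(x):
--         while parent[x] != x:
--             x = parent[x]
--         return x
--
--     for i in range(r):
--         for j in range(c):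
--             v = g[i][j]
--             if v == 0:
--                 continue
--             for ni, nj in ((i, j + 1), (i + 1, j)):
--                 if ni < r and nj < c and g[ni][nj] == v:
--                     ra, rb = find(i * c + j), find(ni * c + nj)
--                     if ra != rb:
--                         if rb < ra:
--                             ra, rb = rb, ra
--                         parent[rb] = ra
--     comps = {}
--     for i in range(r):
--         for j in range(c):
--             if g[i][j] != 0:
--                 comps.setdefault(find(i * c + j), []).append((i, j))
--     if not comps:
--         return [row[:] for row in g]
--     smallest = min(comps.values(), key=len)
--     rows = [p[0] for p in smallest]
--     cols = [p[1] for p in smallest]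
--     out = [[0] * (max(cols) - min(cols) + 1) for _ in range(max(rows) - min(rows) + 1)]
--     for i, j in smallest:
--         out[i - min(rows)][j - min(cols)] = g[i][j]
--     return out
-- ===== Notes on version B (the rewrite author's own statement) =====
-- stated objective: alternative
-- what changed: The BFS flood fill with a visited matrix and an objects list is replaced by union-find connected-component labeling: a parent array over all cells, one row-major pass unioning each nonzero cell with its right/down equal-valued neighbour (smaller-index root wins, so each class root is its row-major-minimal cell), then one pass bucketing nonzero cells by find(root) into a dict whose insertion order reproduces A's first-appearance component order before the same min-by-size selection and crop.
import Mathlib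
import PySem

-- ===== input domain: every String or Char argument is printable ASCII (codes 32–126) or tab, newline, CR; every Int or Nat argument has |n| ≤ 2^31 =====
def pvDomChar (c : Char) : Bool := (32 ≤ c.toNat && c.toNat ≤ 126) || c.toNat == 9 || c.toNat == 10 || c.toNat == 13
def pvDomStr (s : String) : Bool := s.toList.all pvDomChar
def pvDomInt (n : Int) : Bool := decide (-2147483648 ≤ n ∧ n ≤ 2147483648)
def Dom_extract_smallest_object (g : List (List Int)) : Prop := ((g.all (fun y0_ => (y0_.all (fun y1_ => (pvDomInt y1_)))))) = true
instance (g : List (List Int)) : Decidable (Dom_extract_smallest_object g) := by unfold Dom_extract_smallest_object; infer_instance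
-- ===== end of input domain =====

-- B replaces A's BFS flood fill (visited matrix + per-seed queue) by union-find component
-- labeling: a parent array over all cells, one pass unioning equal-valued right/down neighbours
-- (smaller-index root wins), then one pass bucketing nonzero cells by their root into a dict whose
-- insertion order reproduces A's first-appearance component order; the claim is about the return
-- value only.

-- cell read g[i][j] (total via getD; exact on the in-bounds cells of grids admitted by Pre_)
def pvAt (g : List (List Int)) (p : Int × Int) : Int :=
  (g.getD p.1.toNat []).getD p.2.toNat 0

def pvDirs : List (Int × Int) := [(-1,0),(1,0),(0,-1),(0,1)]

-- nested assignment out[i][j] = x (the fill loop is the same code in Source A and Source B)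
def pvGset (out : List (List Int)) (i j : Int) (x : Int) : List (List Int) :=
  out.set i.toNat ((out.getD i.toNat []).set j.toNat x)

-- bounding box + fill of the chosen component (identical tail code in Source A and Source B)
def pvCrop (g : List (List Int)) (cells : List (Int × Int)) : List (List Int) :=
  let r0 := (PySem.List.min? (cells.map Prod.fst) (fun x => x)).getD 0
  let r1 := (PySem.List.max? (cells.map Prod.fst) (fun x => x)).getD 0
  let c0 := (PySem.List.min? (cells.map Prod.snd) (fun x => x)).getD 0
  let c1 := (PySem.List.max? (cells.map Prod.snd) (fun x => x)).getD 0
  let init : List (List Int) := List.replicate (r1 - r0 + 1).toNat (List.replicate (c1 - c0 + 1).toNat 0)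
  cells.foldl (fun out p => pvGset out (p.1 - r0) (p.2 - c0) (pvAt g p)) init

-- ===== PORT A =====
-- visited[i][j] as a boolean matrix, exactly as in A
def pvVget (v : List (List Bool)) (p : Int × Int) : Bool :=
  (v.getD p.1.toNat []).getD p.2.toNat false

def pvVset (v : List (List Bool)) (p : Int × Int) : List (List Bool) :=
  v.set p.1.toNat ((v.getD p.1.toNat []).set p.2.toNat true)

-- the `while q:` loop of A's bfs; fuel r*c+1 dominates the iteration count (each pop either
-- empties the queue or was enabled by an earlier fresh visited-mark, of which there are ≤ r*c)
def pvBfsLoop (g : List (List Int)) (r c : Nat) (color : Int) :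
    Nat → List (Int × Int) → List (List Bool) → List (Int × Int) →
    List (Int × Int) × List (List Bool)
  | 0, _, v, cells => (cells, v)
  | _ + 1, [], v, cells => (cells, v)
  | fuel + 1, p :: qt, v, cells =>
    let st := pvDirs.foldl
      (fun (st : List (Int × Int) × List (List Bool)) d =>
        let n := (p.1 + d.1, p.2 + d.2)
        if 0 ≤ n.1 ∧ n.1 < (r : Int) ∧ 0 ≤ n.2 ∧ n.2 < (c : Int) ∧
            pvVget st.2 n = false ∧ pvAt g n = color
        then (st.1 ++ [n], pvVset st.2 n) else st)
      (qt, v)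
    pvBfsLoop g r c color fuel st.1 st.2 (cells ++ [p])

-- the body of A's outer scan (`if not visited[i][j] and g[i][j] != 0: obj = bfs(i, j); …`)
def pvBodyA (g : List (List Int)) (r c : Nat)
    (st : List (List Bool) × List (List (Int × Int))) (p : Int × Int) :
    List (List Bool) × List (List (Int × Int)) :=
  if pvVget st.1 p = false ∧ pvAt g p ≠ 0 then
    let res := pvBfsLoop g r c (pvAt g p) (r * c + 1) [p] (pvVset st.1 p) []
    (res.2, if res.1 = [] then st.2 else st.2 ++ [res.1])
  else st

def pvFindObjects (g : List (List Int)) : List (List (Int × Int)) :=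
  match g with
  | [] => []
  | g0 :: _ =>
    if g0 = [] then [] else
    let r := g.length
    let c := g0.length
    let coords : List (Int × Int) :=
      (List.range r).flatMap (fun (i : Nat) => (List.range c).map (fun (j : Nat) => ((i : Int), (j : Int))))
    let fin := coords.foldl (pvBodyA g r c) (List.replicate r (List.replicate c false), [])
    fin.2

def extract_smallest_object (g : List (List Int)) : List (List Int) :=
  match pvFindObjects g with
  | [] => g.map (fun row => row)
  | o :: os => pvCrop g ((PySem.List.min? (o :: os) (fun x => x.length)).getD [])

-- ===== PORT B =====
-- flat index i*c+j of a cell (as computed by Source B)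
def pvIdx (c : Nat) (p : Int × Int) : Nat := p.1.toNat * c + p.2.toNat

-- Source B's `find`: follow parent pointers until a fixpoint; parent[x] ≤ x always holds in this
-- algorithm (roots are unioned toward the smaller index), so fuel r*c+1 dominates the walk
def ufFind (par : List Nat) : Nat → Nat → Nat
  | 0, x => x
  | fuel + 1, x => if par.getD x x = x then x else ufFind par fuel (par.getD x x)

-- the body of Source B's union pass for one cell: union with the right and down neighbour when
-- in bounds and of the same nonzero value, re-parenting the larger root onto the smaller
def pvUnionCell (g : List (List Int)) (r c : Nat) (par : List Nat) (p : Int × Int) : List Nat :=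
  if pvAt g p = 0 then par else
  [(p.1, p.2 + 1), (p.1 + 1, p.2)].foldl (fun par q =>
    if q.1 < (r : Int) ∧ q.2 < (c : Int) ∧ pvAt g q = pvAt g p then
      let ra := ufFind par (r * c + 1) (pvIdx c p)
      let rb := ufFind par (r * c + 1) (pvIdx c q)
      if ra ≠ rb then (if rb < ra then par.set ra rb else par.set rb ra) else par
    else par) par

-- the body of Source B's bucketing pass: comps.setdefault(find(i*c+j), []).append((i, j))
def pvBodyB (g : List (List Int)) (r c : Nat) (par : List Nat)
    (d : PySem.Dict Nat (List (Int × Int))) (p : Int × Int) :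
    PySem.Dict Nat (List (Int × Int)) :=
  if pvAt g p ≠ 0 then d.modify (ufFind par (r * c + 1) (pvIdx c p)) [] (fun l => l ++ [p]) else d

def extract_smallest_object_alt (g : List (List Int)) : List (List Int) :=
  match g with
  | [] => List.map (fun row => row) ([] : List (List Int))
  | g0 :: _ =>
    if g0 = [] then g.map (fun row => row) else
    let r := g.length
    let c := g0.length
    let coords : List (Int × Int) :=
      (List.range r).flatMap (fun (i : Nat) => (List.range c).map (fun (j : Nat) => ((i : Int), (j : Int))))
    let par := coords.foldl (fun par p => pvUnionCell g r c par p) (List.range (r * c))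
    let comps := coords.foldl (pvBodyB g r c par) PySem.Dict.empty
    match PySem.List.min? comps.values (fun l => l.length) with
    | none => g.map (fun row => row)
    | some smallest => pvCrop g smallest

-- ===== PRECONDITION & SPEC =====
-- Pre_ excludes grids whose first row is longer than some later row: there the Python A raises
-- IndexError while scanning (its row/column counts come from g and g[0] alone).
def Pre_extract_smallest_object (g : List (List Int)) : Prop :=
  g = [] ∨ g.headD [] = [] ∨ ∀ row ∈ g, (g.headD []).length ≤ row.length
instance (g : List (List Int)) : Decidable (Pre_extract_smallest_object g) := by
  unfold Pre_extract_smallest_object; infer_instance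

def pvWitness_extract_smallest_object : List (List Int) := [[1, 0], [0, 2]]

def Spec_extract_smallest_object (g : List (List Int)) (out : List (List Int)) : Prop := out = extract_smallest_object_alt g
instance (g : List (List Int)) (out : List (List Int)) : Decidable (Spec_extract_smallest_object g out) := by unfold Spec_extract_smallest_object; infer_instance

-- ===== CLAIM (what is proved, stated in full; the proofs are below) =====
def Claim_equal_extract_smallest_object : Prop := ∀ (g : List (List Int)), Dom_extract_smallest_object g → Pre_extract_smallest_object g → Spec_extract_smallest_object g (extract_smallest_object g)

-- ===== LEMMAS AND PROOFS =====

-- in-bounds predicate, the adjacency step of the flood fill, and reachability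
def pvIn (r c : Nat) (p : Int × Int) : Prop :=
  0 ≤ p.1 ∧ p.1 < (r : Int) ∧ 0 ≤ p.2 ∧ p.2 < (c : Int)

def pvAdj (g : List (List Int)) (r c : Nat) (col : Int) (p q : Int × Int) : Prop :=
  pvIn r c q ∧ (∃ d ∈ pvDirs, q = (p.1 + d.1, p.2 + d.2)) ∧ pvAt g q = col

def pvReach (g : List (List Int)) (r c : Nat) (col : Int) (s t : Int × Int) : Prop :=
  Relation.ReflTransGen (pvAdj g r c col) s t

-- the finite set of in-bounds cells
def pvInSet (r c : Nat) : Finset (Int × Int) :=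
  (Finset.range r ×ˢ Finset.range c).image (fun ij => ((ij.1 : Int), (ij.2 : Int)))

def pvVcount (r c : Nat) (v : List (List Bool)) : Nat :=
  ((pvInSet r c).filter (fun p => pvVget v p = true)).card

def pvShape (r c : Nat) (v : List (List Bool)) : Prop :=
  v.length = r ∧ ∀ row ∈ v, row.length = c

lemma mem_pvInSet (r c : Nat) (p : Int × Int) : p ∈ pvInSet r c ↔ pvIn r c p := by
  unfold pvInSet pvIn
  simp only [Finset.mem_image, Finset.mem_product, Finset.mem_range]
  constructor
  · rintro ⟨⟨i, j⟩, ⟨hi, hj⟩, rfl⟩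
    refine ⟨?_, ?_, ?_, ?_⟩ <;> simp <;> omega
  · rintro ⟨h1, h2, h3, h4⟩
    refine ⟨(p.1.toNat, p.2.toNat), ⟨?_, ?_⟩, ?_⟩
    · omega
    · omega
    · have e1 : ((p.1.toNat : Int)) = p.1 := Int.toNat_of_nonneg h1
      have e2 : ((p.2.toNat : Int)) = p.2 := Int.toNat_of_nonneg h3
      exact Prod.ext e1 e2

lemma card_pvInSet (r c : Nat) : (pvInSet r c).card = r * c := by
  unfold pvInSet
  rw [Finset.card_image_of_injective]
  · simp [Finset.card_product]
  · intro a b hab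
    simp only [Prod.mk.injEq] at hab
    exact Prod.ext (by exact_mod_cast hab.1) (by exact_mod_cast hab.2)

lemma pvVcount_le (r c : Nat) (v : List (List Bool)) : pvVcount r c v ≤ r * c := by
  unfold pvVcount
  calc ((pvInSet r c).filter (fun p => pvVget v p = true)).card ≤ (pvInSet r c).card :=
        Finset.card_filter_le _ _
    _ = r * c := card_pvInSet r c

lemma pvShape_vset (r c : Nat) (v : List (List Bool)) (p : Int × Int) (h : pvShape r c v) :
    pvShape r c (pvVset v p) := by
  obtain ⟨hl, hr⟩ := h
  by_cases hi : p.1.toNat < v.length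
  · refine ⟨by simp [pvVset, hl], ?_⟩
    intro row hrow
    rcases List.mem_or_eq_of_mem_set hrow with h | h
    · exact hr row h
    · subst h
      rw [List.length_set, List.getD_eq_getElem v [] hi]
      exact hr _ (List.getElem_mem hi)
  · rw [pvVset, List.set_eq_of_length_le (by omega)]
    exact ⟨hl, hr⟩

lemma pvVget_vset_self (r c : Nat) (v : List (List Bool)) (p : Int × Int)
    (hs : pvShape r c v) (hp : pvIn r c p) : pvVget (pvVset v p) p = true := by
  obtain ⟨hl, hr⟩ := hs
  obtain ⟨h1, h2, h3, h4⟩ := hp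
  have hi : p.1.toNat < v.length := by omega
  have hrow : (v.getD p.1.toNat []).length = c := hr _ (by
    rw [List.getD_eq_getElem v [] hi]; exact List.getElem_mem hi)
  have hj : p.2.toNat < (v.getD p.1.toNat []).length := by omega
  unfold pvVget pvVset
  have hj' : p.2.toNat < (v[p.1.toNat]?.getD []).length := by
    simpa only [List.getD_eq_getElem?_getD] using hj
  simp only [List.getD_eq_getElem?_getD, List.getElem?_set_self hi, Option.getD_some,
    List.getElem?_set_self hj']

lemma pvVget_vset_ne (v : List (List Bool)) (p t : Int × Int)
    (hp : 0 ≤ p.1 ∧ 0 ≤ p.2) (ht : 0 ≤ t.1 ∧ 0 ≤ t.2) (hne : t ≠ p) :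
    pvVget (pvVset v p) t = pvVget v t := by
  have hcoord : p.1.toNat ≠ t.1.toNat ∨ p.2.toNat ≠ t.2.toNat := by
    by_contra hcon
    push Not at hcon
    apply hne
    have e1 : t.1 = p.1 := by omega
    have e2 : t.2 = p.2 := by omega
    exact Prod.ext e1 e2
  unfold pvVget pvVset
  rcases hcoord with h | h
  · simp only [List.getD_eq_getElem?_getD, List.getElem?_set_ne h]
  · by_cases heq : p.1.toNat = t.1.toNat
    · rw [heq]
      by_cases hi : t.1.toNat < v.length
      · simp only [List.getD_eq_getElem?_getD, List.getElem?_set_self hi, Option.getD_some,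
          List.getElem?_set_ne h]
      · rw [List.set_eq_of_length_le (by omega)]
    · simp only [List.getD_eq_getElem?_getD, List.getElem?_set_ne heq]

lemma pvVcount_vset (r c : Nat) (v : List (List Bool)) (p : Int × Int)
    (hs : pvShape r c v) (hp : pvIn r c p) (hv : pvVget v p = false) :
    pvVcount r c (pvVset v p) = pvVcount r c v + 1 := by
  unfold pvVcount
  have hfilter : (pvInSet r c).filter (fun t => pvVget (pvVset v p) t = true) =
      insert p ((pvInSet r c).filter (fun t => pvVget v t = true)) := by
    ext t
    simp only [Finset.mem_filter, Finset.mem_insert]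
    constructor
    · rintro ⟨htin, hget⟩
      by_cases hne : t = p
      · exact Or.inl hne
      · right
        have htIn := (mem_pvInSet r c t).mp htin
        rw [pvVget_vset_ne v p t ⟨hp.1, hp.2.2.1⟩ ⟨htIn.1, htIn.2.2.1⟩ hne] at hget
        exact ⟨htin, hget⟩
    · rintro (rfl | ⟨htin, hget⟩)
      · exact ⟨(mem_pvInSet r c t).mpr hp, pvVget_vset_self r c v t hs hp⟩
      · refine ⟨htin, ?_⟩
        by_cases hne : t = p
        · subst hne; exact pvVget_vset_self r c v t hs hp
        · have htIn := (mem_pvInSet r c t).mp htin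
          rw [pvVget_vset_ne v p t ⟨hp.1, hp.2.2.1⟩ ⟨htIn.1, htIn.2.2.1⟩ hne]
          exact hget
  rw [hfilter, Finset.card_insert_of_notMem]
  simp only [Finset.mem_filter, not_and]
  intro _
  simp [hv]

lemma pvVget_replicate (r c : Nat) (t : Int × Int) :
    pvVget (List.replicate r (List.replicate c false)) t = false := by
  unfold pvVget
  by_cases hi : t.1.toNat < r
  · rw [List.getD_replicate _ hi]
    by_cases hj : t.2.toNat < c
    · rw [List.getD_replicate _ hj]
    · rw [List.getD_eq_getElem?_getD, List.getElem?_eq_none (by simpa using Nat.le_of_not_lt hj)]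
      rfl
  · have hrow : (List.replicate r (List.replicate c false)).getD t.1.toNat [] = [] := by
      rw [List.getD_eq_getElem?_getD, List.getElem?_eq_none (by simpa using Nat.le_of_not_lt hi)]
      rfl
    rw [hrow]
    rfl

lemma pvDirs_neg (d : Int × Int) (hd : d ∈ pvDirs) :
    ∃ d' ∈ pvDirs, d'.1 = -d.1 ∧ d'.2 = -d.2 := by
  simp only [pvDirs, List.mem_cons, List.not_mem_nil, or_false] at hd
  rcases hd with rfl | rfl | rfl | rfl <;> decide

-- nodes reached from s carry colour col (or are s itself) and are in bounds
lemma pvReach_prop (g : List (List Int)) (r c : Nat) (col : Int) (s t : Int × Int)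
    (h : pvReach g r c col s t) : t = s ∨ (pvIn r c t ∧ pvAt g t = col) := by
  induction h with
  | refl => exact Or.inl rfl
  | tail _ hadj _ => exact Or.inr ⟨hadj.1, hadj.2.2⟩

lemma pvReach_symm (g : List (List Int)) (r c : Nat) (col : Int) (s t : Int × Int)
    (hs : pvIn r c s) (hcol : pvAt g s = col) (h : pvReach g r c col s t) :
    pvReach g r c col t s := by
  induction h with
  | refl => exact Relation.ReflTransGen.refl
  | @tail b u hab hadj ih =>
    have hb : pvIn r c b ∧ pvAt g b = col := by
      rcases pvReach_prop g r c col s b hab with rfl | hh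
      · exact ⟨hs, hcol⟩
      · exact hh
    obtain ⟨hbu, ⟨d, hd, hu⟩, _⟩ := hadj
    obtain ⟨d', hd', hd1, hd2⟩ := pvDirs_neg d hd
    have hstep : pvAdj g r c col u b := by
      refine ⟨hb.1, ⟨d', hd', ?_⟩, hb.2⟩
      have e1 : u.1 = b.1 + d.1 := by rw [hu]
      have e2 : u.2 = b.2 + d.2 := by rw [hu]
      refine Prod.ext ?_ ?_ <;> simp only [hd1, hd2] <;> omega
    exact Relation.ReflTransGen.head hstep ih

-- ===== the BFS loop of A =====
def pvStepA (g : List (List Int)) (r c : Nat) (color : Int) (p : Int × Int)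
    (st : List (Int × Int) × List (List Bool)) (d : Int × Int) :
    List (Int × Int) × List (List Bool) :=
  let n := (p.1 + d.1, p.2 + d.2)
  if 0 ≤ n.1 ∧ n.1 < (r : Int) ∧ 0 ≤ n.2 ∧ n.2 < (c : Int) ∧
      pvVget st.2 n = false ∧ pvAt g n = color
  then (st.1 ++ [n], pvVset st.2 n) else st

lemma pvBfsLoop_cons (g : List (List Int)) (r c : Nat) (col : Int) (fuel : Nat)
    (p : Int × Int) (qt : List (Int × Int)) (v : List (List Bool)) (cells : List (Int × Int)) :
    pvBfsLoop g r c col (fuel + 1) (p :: qt) v cells =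
      pvBfsLoop g r c col fuel (pvDirs.foldl (pvStepA g r c col p) (qt, v)).1
        (pvDirs.foldl (pvStepA g r c col p) (qt, v)).2 (cells ++ [p]) := rfl

lemma pvFoldA_spec (g : List (List Int)) (r c : Nat) (col : Int) (p : Int × Int)
    (ds : List (Int × Int)) (q0 : List (Int × Int)) (v0 : List (List Bool))
    (hs : pvShape r c v0) :
    ∃ new : List (Int × Int),
      (ds.foldl (pvStepA g r c col p) (q0, v0)).1 = q0 ++ new ∧
      pvShape r c (ds.foldl (pvStepA g r c col p) (q0, v0)).2 ∧
      new.Nodup ∧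
      (∀ t ∈ new, pvIn r c t ∧ pvAt g t = col ∧ pvVget v0 t = false ∧
        ∃ d ∈ ds, t = (p.1 + d.1, p.2 + d.2)) ∧
      (∀ t, pvIn r c t →
        (pvVget (ds.foldl (pvStepA g r c col p) (q0, v0)).2 t = true ↔
          pvVget v0 t = true ∨ t ∈ new)) ∧
      pvVcount r c (ds.foldl (pvStepA g r c col p) (q0, v0)).2 = pvVcount r c v0 + new.length ∧
      (∀ d ∈ ds, ∀ t : Int × Int, t = (p.1 + d.1, p.2 + d.2) → pvIn r c t → pvAt g t = col →
        pvVget (ds.foldl (pvStepA g r c col p) (q0, v0)).2 t = true) := by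
  induction ds generalizing q0 v0 with
  | nil =>
    refine ⟨[], by simp, hs, List.nodup_nil, by simp, ?_, by simp, by simp⟩
    intro t _
    simp
  | cons d ds ih =>
    simp only [List.foldl_cons]
    set n : Int × Int := (p.1 + d.1, p.2 + d.2) with hn
    by_cases hC : 0 ≤ n.1 ∧ n.1 < (r : Int) ∧ n.2 ≥ 0 ∧ n.2 < (c : Int) ∧
        pvVget v0 n = false ∧ pvAt g n = col
    all_goals have hstep : pvStepA g r c col p (q0, v0) d =
        (if 0 ≤ n.1 ∧ n.1 < (r : Int) ∧ 0 ≤ n.2 ∧ n.2 < (c : Int) ∧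
            pvVget v0 n = false ∧ pvAt g n = col
         then (q0 ++ [n], pvVset v0 n) else (q0, v0)) := rfl
    · -- the neighbour is fresh: it is enqueued and marked
      obtain ⟨hC1, hC2, hC3, hC4, hC5, hC6⟩ := hC
      have hnin : pvIn r c n := ⟨hC1, hC2, hC3, hC4⟩
      rw [hstep, if_pos ⟨hC1, hC2, hC3, hC4, hC5, hC6⟩]
      obtain ⟨new, e1, hsh, hnd, hmem, hiff, hcnt, hcomp⟩ :=
        ih (q0 ++ [n]) (pvVset v0 n) (pvShape_vset r c v0 n hs)
      have hnnotnew : n ∉ new := by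
        intro hcon
        have := (hmem n hcon).2.2.1
        rw [pvVget_vset_self r c v0 n hs hnin] at this
        exact absurd this (by decide)
      refine ⟨n :: new, ?_, hsh, ?_, ?_, ?_, ?_, ?_⟩
      · rw [e1, List.append_assoc]
        rfl
      · exact List.nodup_cons.mpr ⟨hnnotnew, hnd⟩
      · intro t ht
        rcases List.mem_cons.mp ht with rfl | ht
        · exact ⟨hnin, hC6, hC5, d, List.mem_cons_self, rfl⟩
        · obtain ⟨htin, htcol, htget, d', hd', he'⟩ := hmem t ht
          have htne : t ≠ n := fun hcon => hnnotnew (hcon ▸ ht)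
          rw [pvVget_vset_ne v0 n t ⟨hC1, hC3⟩ ⟨htin.1, htin.2.2.1⟩ htne] at htget
          exact ⟨htin, htcol, htget, d', List.mem_cons_of_mem d hd', he'⟩
      · intro t htin
        rw [hiff t htin]
        by_cases htn : t = n
        · rw [htn, pvVget_vset_self r c v0 n hs hnin]
          simp only [List.mem_cons]
          tauto
        · rw [pvVget_vset_ne v0 n t ⟨hC1, hC3⟩ ⟨htin.1, htin.2.2.1⟩ htn]
          simp only [List.mem_cons]
          tauto
      · rw [hcnt, pvVcount_vset r c v0 n hs hnin hC5, List.length_cons]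
        omega
      · intro d'' hd'' t ht htin htcol
        rcases List.mem_cons.mp hd'' with rfl | hd''
        · subst ht
          rw [hiff n hnin]
          left
          exact pvVget_vset_self r c v0 n hs hnin
        · exact hcomp d'' hd'' t ht htin htcol
    · -- guard false: state unchanged for this direction
      have hC' : ¬ (0 ≤ n.1 ∧ n.1 < (r : Int) ∧ 0 ≤ n.2 ∧ n.2 < (c : Int) ∧
          pvVget v0 n = false ∧ pvAt g n = col) := by
        intro hcon
        exact hC ⟨hcon.1, hcon.2.1, hcon.2.2.1, hcon.2.2.2⟩
      rw [hstep, if_neg hC']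
      obtain ⟨new, e1, hsh, hnd, hmem, hiff, hcnt, hcomp⟩ := ih q0 v0 hs
      refine ⟨new, e1, hsh, hnd, ?_, hiff, hcnt, ?_⟩
      · intro t ht
        obtain ⟨htin, htcol, htget, d', hd', he'⟩ := hmem t ht
        exact ⟨htin, htcol, htget, d', List.mem_cons_of_mem d hd', he'⟩
      · intro d'' hd'' t ht htin htcol
        rcases List.mem_cons.mp hd'' with rfl | hd''
        · subst ht
          have hget : pvVget v0 n = true := by
            by_cases hb : pvVget v0 n = false
            · exact absurd ⟨htin.1, htin.2.1, htin.2.2.1, htin.2.2.2, hb, htcol⟩ hC'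
            · exact Bool.ne_false_iff.mp hb
          rw [hiff n htin]
          left
          exact hget
        · exact hcomp d'' hd'' t ht htin htcol

lemma pvBfsLoop_spec (g : List (List Int)) (r c : Nat) (col : Int)
    (K ext : Int × Int → Prop)
    (hK : ∀ p q, K p → pvAdj g r c col p q → K q)
    (hext : ∀ t, ext t → ¬ K t) :
    ∀ (fuel : Nat) (q : List (Int × Int)) (v : List (List Bool)) (cells : List (Int × Int)),
    pvShape r c v →
    (∀ t, pvIn r c t → (pvVget v t = true ↔ ext t ∨ t ∈ cells ++ q)) →
    (∀ t ∈ cells ++ q, pvIn r c t ∧ pvAt g t = col ∧ K t) →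
    (cells ++ q).Nodup →
    (∀ p ∈ cells, ∀ t, pvAdj g r c col p t → pvVget v t = true) →
    q.length + (r * c - pvVcount r c v) ≤ fuel →
    pvShape r c (pvBfsLoop g r c col fuel q v cells).2 ∧
    (∀ t, pvIn r c t → (pvVget (pvBfsLoop g r c col fuel q v cells).2 t = true ↔
        ext t ∨ t ∈ (pvBfsLoop g r c col fuel q v cells).1)) ∧
    (pvBfsLoop g r c col fuel q v cells).1.Nodup ∧
    (∀ t ∈ cells ++ q, t ∈ (pvBfsLoop g r c col fuel q v cells).1) ∧
    (∀ t ∈ (pvBfsLoop g r c col fuel q v cells).1, pvIn r c t ∧ pvAt g t = col ∧ K t) ∧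
    (∀ p ∈ (pvBfsLoop g r c col fuel q v cells).1, ∀ t, pvAdj g r c col p t →
        ext t ∨ t ∈ (pvBfsLoop g r c col fuel q v cells).1) := by
  intro fuel
  induction fuel with
  | zero =>
    intro q v cells hs hiff hprops hnd hcl hfuel
    have hq : q = [] := List.eq_nil_of_length_eq_zero (by omega)
    subst hq
    have e : pvBfsLoop g r c col 0 [] v cells = (cells, v) := rfl
    rw [e]
    refine ⟨hs, ?_, by simpa using hnd, by simp, ?_, ?_⟩
    · intro t htin
      simpa using hiff t htin
    · intro t ht
      exact hprops t (by simpa using ht)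
    · intro p hp t hadj
      have := hcl p (by simpa using hp) t hadj
      have h2 := (hiff t hadj.1).mp this
      simpa using h2
  | succ fuel ih =>
    intro q v cells hs hiff hprops hnd hcl hfuel
    cases q with
    | nil =>
      have e : pvBfsLoop g r c col (fuel + 1) [] v cells = (cells, v) := rfl
      rw [e]
      refine ⟨hs, ?_, by simpa using hnd, by simp, ?_, ?_⟩
      · intro t htin
        simpa using hiff t htin
      · intro t ht
        exact hprops t (by simpa using ht)
      · intro p hp t hadj
        have := hcl p (by simpa using hp) t hadj
        have h2 := (hiff t hadj.1).mp this
        simpa using h2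
    | cons p qt =>
      rw [pvBfsLoop_cons]
      obtain ⟨new, e1, hsh2, hndnew, hmem, hiff2, hcnt, hcomp⟩ :=
        pvFoldA_spec g r c col p pvDirs qt v hs
      rw [e1]
      have hpK := hprops p (by simp)
      have hKnew : ∀ t ∈ new, K t := by
        intro t ht
        obtain ⟨htin, htcol, _, d, hd, he⟩ := hmem t ht
        exact hK p t hpK.2.2 ⟨htin, ⟨d, hd, he⟩, htcol⟩
      obtain ⟨C1, C2, C3, C4, C5, C6⟩ := ih (qt ++ new)
        (pvDirs.foldl (pvStepA g r c col p) (qt, v)).2 (cells ++ [p]) hsh2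
        (by
          intro t htin
          rw [hiff2 t htin, hiff t htin]
          simp only [List.mem_append, List.mem_cons]
          tauto)
        (by
          intro t ht
          rcases List.mem_append.mp ht with h1 | h2
          · rcases List.mem_append.mp h1 with h | h
            · exact hprops t (by simp [h])
            · have he : t = p := by simpa using h
              subst he
              exact hpK
          · rcases List.mem_append.mp h2 with h | h
            · exact hprops t (by simp [h])
            · obtain ⟨htin, htcol, _, d, hd, he⟩ := hmem t h
              exact ⟨htin, htcol, hKnew t h⟩)
        (by
          have e2 : (cells ++ [p]) ++ (qt ++ new) = (cells ++ p :: qt) ++ new := by simp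
          rw [e2, List.nodup_append]
          refine ⟨hnd, hndnew, ?_⟩
          intro a ha b hb hab
          subst hab
          have hain : pvIn r c a := (hprops a ha).1
          have h1 : pvVget v a = true := (hiff a hain).mpr (Or.inr ha)
          have h2 : pvVget v a = false := (hmem a hb).2.2.1
          rw [h1] at h2
          exact absurd h2 (by decide))
        (by
          intro p' hp' t hadj
          rcases List.mem_append.mp hp' with h | h
          · have := hcl p' h t hadj
            exact (hiff2 t hadj.1).mpr (Or.inl this)
          · have hp'' : p' = p := by simpa using h
            subst hp''
            obtain ⟨htin, ⟨d, hd, he⟩, hcol2⟩ := hadj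
            exact hcomp d hd t he htin hcol2)
        (by
          have hb := pvVcount_le r c (pvDirs.foldl (pvStepA g r c col p) (qt, v)).2
          rw [hcnt] at hb
          simp only [List.length_append, List.length_cons] at hfuel ⊢
          omega)
      refine ⟨C1, C2, C3, ?_, C5, C6⟩
      intro t ht
      apply C4
      simp only [List.mem_append, List.mem_cons] at ht ⊢
      tauto

-- running A's bfs from a fresh seed collects exactly the reachable class
lemma pvBfsRun (g : List (List Int)) (r c : Nat) (col : Int) (s : Int × Int)
    (v : List (List Bool)) (hs : pvShape r c v) (hin : pvIn r c s) (hcol : pvAt g s = col)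
    (hfresh : pvVget v s = false)
    (hext : ∀ t, pvIn r c t → pvVget v t = true → ¬ pvReach g r c col s t) :
    pvShape r c (pvBfsLoop g r c col (r * c + 1) [s] (pvVset v s) []).2 ∧
    (∀ t, pvIn r c t → (pvVget (pvBfsLoop g r c col (r * c + 1) [s] (pvVset v s) []).2 t = true ↔
        pvVget v t = true ∨ t ∈ (pvBfsLoop g r c col (r * c + 1) [s] (pvVset v s) []).1)) ∧
    (pvBfsLoop g r c col (r * c + 1) [s] (pvVset v s) []).1.Nodup ∧
    (∀ t, t ∈ (pvBfsLoop g r c col (r * c + 1) [s] (pvVset v s) []).1 ↔ pvReach g r c col s t) := by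
  have hK : ∀ p q, pvReach g r c col s p → pvAdj g r c col p q → pvReach g r c col s q :=
    fun _ _ hp ha => hp.tail ha
  have hext' : ∀ t, (pvIn r c t ∧ pvVget v t = true) → ¬ pvReach g r c col s t :=
    fun t ht => hext t ht.1 ht.2
  obtain ⟨C1, C2, C3, C4, C5, C6⟩ := pvBfsLoop_spec g r c col (pvReach g r c col s)
    (fun t => pvIn r c t ∧ pvVget v t = true) hK hext' (r * c + 1) [s] (pvVset v s) []
    (pvShape_vset r c v s hs)
    (by
      intro t htin
      simp only [List.nil_append, List.mem_singleton]
      by_cases hts : t = s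
      · subst hts
        rw [pvVget_vset_self r c v t hs hin]
        simp
      · rw [pvVget_vset_ne v s t ⟨hin.1, hin.2.2.1⟩ ⟨htin.1, htin.2.2.1⟩ hts]
        constructor
        · intro h
          exact Or.inl ⟨htin, h⟩
        · rintro (⟨_, h⟩ | rfl)
          · exact h
          · exact absurd rfl hts)
    (by
      intro t ht
      have hts : t = s := by simpa using ht
      subst hts
      exact ⟨hin, hcol, Relation.ReflTransGen.refl⟩)
    (by simp)
    (by intro p hp; simp at hp)
    (by
      have := pvVcount_le r c (pvVset v s)
      simp only [List.length_singleton]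
      omega)
  refine ⟨C1, ?_, C3, ?_⟩
  · intro t htin
    rw [C2 t htin]
    constructor
    · rintro (⟨_, h⟩ | h)
      · exact Or.inl h
      · exact Or.inr h
    · rintro (h | h)
      · exact Or.inl ⟨htin, h⟩
      · exact Or.inr h
  · intro t
    constructor
    · intro ht
      exact (C5 t ht).2.2
    · intro hreach
      induction hreach with
      | refl => exact C4 s (by simp)
      | @tail b u hab hadj ihh =>
        rcases C6 b ihh u hadj with hextt | hmem2
        · exact absurd (hab.tail hadj) (hext u hextt.1 hextt.2)
        · exact hmem2

-- ===== the crop is determined by the component's member set =====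
lemma pvMinval_eq (l1 l2 : List Int) (h : ∀ t, t ∈ l1 ↔ t ∈ l2) (h1 : l1 ≠ []) :
    (PySem.List.min? l1 (fun x => x)).getD 0 = (PySem.List.min? l2 (fun x => x)).getD 0 := by
  have h2 : l2 ≠ [] := by
    intro hc
    obtain ⟨x, hx⟩ := List.exists_mem_of_ne_nil l1 h1
    have := (h x).mp hx
    rw [hc] at this
    simp at this
  have hne1 : PySem.List.min? l1 (fun x : Int => x) ≠ none := by
    rw [Ne, PySem.List.min?_eq_none_iff]; exact h1
  have hne2 : PySem.List.min? l2 (fun x : Int => x) ≠ none := by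
    rw [Ne, PySem.List.min?_eq_none_iff]; exact h2
  obtain ⟨m1, hm1⟩ := Option.ne_none_iff_exists'.mp hne1
  obtain ⟨m2, hm2⟩ := Option.ne_none_iff_exists'.mp hne2
  rw [hm1, hm2, Option.getD_some, Option.getD_some]
  have a1 := PySem.List.min?_isMin hm1
  have a2 := PySem.List.min?_isMin hm2
  exact le_antisymm (a1 m2 ((h m2).mpr (PySem.List.min?_mem hm2)))
    (a2 m1 ((h m1).mp (PySem.List.min?_mem hm1)))

lemma pvMaxval_eq (l1 l2 : List Int) (h : ∀ t, t ∈ l1 ↔ t ∈ l2) (h1 : l1 ≠ []) :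
    (PySem.List.max? l1 (fun x => x)).getD 0 = (PySem.List.max? l2 (fun x => x)).getD 0 := by
  have h2 : l2 ≠ [] := by
    intro hc
    obtain ⟨x, hx⟩ := List.exists_mem_of_ne_nil l1 h1
    have := (h x).mp hx
    rw [hc] at this
    simp at this
  have hne1 : PySem.List.max? l1 (fun x : Int => x) ≠ none := by
    rw [Ne, PySem.List.max?_eq_none_iff]; exact h1
  have hne2 : PySem.List.max? l2 (fun x : Int => x) ≠ none := by
    rw [Ne, PySem.List.max?_eq_none_iff]; exact h2
  obtain ⟨m1, hm1⟩ := Option.ne_none_iff_exists'.mp hne1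
  obtain ⟨m2, hm2⟩ := Option.ne_none_iff_exists'.mp hne2
  rw [hm1, hm2, Option.getD_some, Option.getD_some]
  have a1 := PySem.List.max?_isMax hm1
  have a2 := PySem.List.max?_isMax hm2
  exact le_antisymm (a2 m1 ((h m1).mp (PySem.List.max?_mem hm1)))
    (a1 m2 ((h m2).mpr (PySem.List.max?_mem hm2)))

lemma pvGset_entry_ne (out : List (List Int)) (i j : Int) (x : Int) (a b : Nat)
    (h : ¬ (i.toNat = a ∧ j.toNat = b)) :
    ((pvGset out i j x).getD a []).getD b 0 = ((out.getD a []).getD b 0) := by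
  unfold pvGset
  by_cases hia : i.toNat = a
  · subst hia
    have hjb : j.toNat ≠ b := fun hc => h ⟨rfl, hc⟩
    by_cases hi : i.toNat < out.length
    · simp only [List.getD_eq_getElem?_getD, List.getElem?_set_self hi, Option.getD_some,
        List.getElem?_set_ne hjb]
    · rw [List.set_eq_of_length_le (by omega)]
  · simp only [List.getD_eq_getElem?_getD, List.getElem?_set_ne hia]

lemma pvGset_entry_self (out : List (List Int)) (i j : Int) (x : Int)
    (hi : i.toNat < out.length) (hj : j.toNat < (out.getD i.toNat []).length) :
    ((pvGset out i j x).getD i.toNat []).getD j.toNat 0 = x := by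
  unfold pvGset
  have hj' : j.toNat < (out[i.toNat]?.getD []).length := by
    simpa only [List.getD_eq_getElem?_getD] using hj
  simp only [List.getD_eq_getElem?_getD, List.getElem?_set_self hi, Option.getD_some,
    List.getElem?_set_self hj']

lemma pvGset_shape (out : List (List Int)) (i j : Int) (x : Int) :
    (pvGset out i j x).length = out.length ∧
    ∀ a : Nat, ((pvGset out i j x).getD a []).length = (out.getD a []).length := by
  refine ⟨by simp [pvGset], ?_⟩
  intro a
  unfold pvGset
  by_cases hia : i.toNat = a
  · subst hia
    by_cases hi : i.toNat < out.length
    · simp only [List.getD_eq_getElem?_getD, List.getElem?_set_self hi, Option.getD_some,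
        List.length_set]
    · rw [List.set_eq_of_length_le (by omega)]
  · simp only [List.getD_eq_getElem?_getD, List.getElem?_set_ne hia]

lemma pvFill_entry (g : List (List Int)) (r0 c0 : Int) (R C : Nat) :
    ∀ (cells : List (Int × Int)) (init : List (List Int)),
    (∀ p ∈ cells, r0 ≤ p.1 ∧ p.1 < r0 + R ∧ c0 ≤ p.2 ∧ p.2 < c0 + C) →
    init.length = R → (∀ a : Nat, a < R → (init.getD a []).length = C) →
    ∀ a b : Nat,
      (((cells.foldl (fun out p => pvGset out (p.1 - r0) (p.2 - c0) (pvAt g p)) init).getD a []).getD b 0) =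
        if ((r0 + a, c0 + b) : Int × Int) ∈ cells then pvAt g (r0 + a, c0 + b)
        else ((init.getD a []).getD b 0) := by
  intro cells
  induction cells with
  | nil =>
    intro init _ _ _ a b
    simp
  | cons p cells ih =>
    intro init hb hlen hrows a b
    simp only [List.foldl_cons]
    have hbp := hb p List.mem_cons_self
    have hshape := pvGset_shape init (p.1 - r0) (p.2 - c0) (pvAt g p)
    rw [ih (pvGset init (p.1 - r0) (p.2 - c0) (pvAt g p))
      (fun q hq => hb q (List.mem_cons_of_mem p hq))
      (hshape.1.trans hlen)
      (fun a' ha' => (hshape.2 a').trans (hrows a' ha'))]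
    by_cases hm : ((r0 + a, c0 + b) : Int × Int) ∈ cells
    · rw [if_pos hm, if_pos (List.mem_cons_of_mem p hm)]
    · rw [if_neg hm]
      by_cases hp : p = ((r0 + a, c0 + b) : Int × Int)
      · rw [if_pos (by rw [← hp]; exact List.mem_cons_self)]
        have ha1 : (p.1 - r0).toNat = a := by
          have : p.1 = r0 + a := by rw [hp]
          omega
        have ha2 : (p.2 - c0).toNat = b := by
          have : p.2 = c0 + b := by rw [hp]
          omega
        have haR : a < R := by omega
        have hbC : b < C := by omega
        have e : ((pvGset init (p.1 - r0) (p.2 - c0) (pvAt g p)).getD (p.1 - r0).toNat []).getD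
            (p.2 - c0).toNat 0 = pvAt g p :=
          pvGset_entry_self init (p.1 - r0) (p.2 - c0) (pvAt g p)
            (by rw [hlen, ha1]; exact haR)
            (by rw [hrows (p.1 - r0).toNat (by rw [ha1]; exact haR), ha2]; exact hbC)
        rw [ha1, ha2] at e
        rw [e, hp]
      · rw [if_neg (by
          intro hc
          rcases List.mem_cons.mp hc with hc | hc
          · exact hp hc.symm
          · exact hm hc)]
        apply pvGset_entry_ne
        intro ⟨e1, e2⟩
        apply hp
        have hp1 : p.1 = r0 + a := by omega
        have hp2 : p.2 = c0 + b := by omega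
        exact Prod.ext hp1 hp2

lemma pvFill_shape (g : List (List Int)) (r0 c0 : Int) (cells : List (Int × Int))
    (init : List (List Int)) :
    (cells.foldl (fun out p => pvGset out (p.1 - r0) (p.2 - c0) (pvAt g p)) init).length = init.length ∧
    ∀ a : Nat, ((cells.foldl (fun out p => pvGset out (p.1 - r0) (p.2 - c0) (pvAt g p)) init).getD a []).length = (init.getD a []).length := by
  induction cells generalizing init with
  | nil => simp
  | cons p cells ih =>
    simp only [List.foldl_cons]
    have h1 := pvGset_shape init (p.1 - r0) (p.2 - c0) (pvAt g p)
    have h2 := ih (pvGset init (p.1 - r0) (p.2 - c0) (pvAt g p))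
    exact ⟨h2.1.trans h1.1, fun a => (h2.2 a).trans (h1.2 a)⟩

lemma pvLen_eq (l1 l2 : List (Int × Int)) (nd1 : l1.Nodup) (nd2 : l2.Nodup)
    (h : ∀ t, t ∈ l1 ↔ t ∈ l2) : l1.length = l2.length := by
  have e : l1.toFinset = l2.toFinset := by
    apply Finset.ext
    intro t
    simp only [List.mem_toFinset]
    exact h t
  rw [← List.toFinset_card_of_nodup nd1, ← List.toFinset_card_of_nodup nd2, e]

lemma pvCrop_ext (g : List (List Int)) (l1 l2 : List (Int × Int))
    (h : ∀ t, t ∈ l1 ↔ t ∈ l2) (h1 : l1 ≠ []) : pvCrop g l1 = pvCrop g l2 := by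
  have hfst : ∀ t : Int, t ∈ l1.map Prod.fst ↔ t ∈ l2.map Prod.fst := by
    intro t
    simp only [List.mem_map]
    constructor
    · rintro ⟨q, hq, rfl⟩
      exact ⟨q, (h q).mp hq, rfl⟩
    · rintro ⟨q, hq, rfl⟩
      exact ⟨q, (h q).mpr hq, rfl⟩
  have hsnd : ∀ t : Int, t ∈ l1.map Prod.snd ↔ t ∈ l2.map Prod.snd := by
    intro t
    simp only [List.mem_map]
    constructor
    · rintro ⟨q, hq, rfl⟩
      exact ⟨q, (h q).mp hq, rfl⟩
    · rintro ⟨q, hq, rfl⟩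
      exact ⟨q, (h q).mpr hq, rfl⟩
  have hm1 : l1.map Prod.fst ≠ [] := by simpa using h1
  have hm1' : l1.map Prod.snd ≠ [] := by simpa using h1
  have er0 := pvMinval_eq (l1.map Prod.fst) (l2.map Prod.fst) hfst hm1
  have er1 := pvMaxval_eq (l1.map Prod.fst) (l2.map Prod.fst) hfst hm1
  have ec0 := pvMinval_eq (l1.map Prod.snd) (l2.map Prod.snd) hsnd hm1'
  have ec1 := pvMaxval_eq (l1.map Prod.snd) (l2.map Prod.snd) hsnd hm1'
  have hne1 : PySem.List.min? (l1.map Prod.fst) (fun x : Int => x) ≠ none := by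
    rw [Ne, PySem.List.min?_eq_none_iff]; exact hm1
  obtain ⟨mr0, hmr0⟩ := Option.ne_none_iff_exists'.mp hne1
  have hne2 : PySem.List.max? (l1.map Prod.fst) (fun x : Int => x) ≠ none := by
    rw [Ne, PySem.List.max?_eq_none_iff]; exact hm1
  obtain ⟨mr1, hmr1⟩ := Option.ne_none_iff_exists'.mp hne2
  have hne3 : PySem.List.min? (l1.map Prod.snd) (fun x : Int => x) ≠ none := by
    rw [Ne, PySem.List.min?_eq_none_iff]; exact hm1'
  obtain ⟨mc0, hmc0⟩ := Option.ne_none_iff_exists'.mp hne3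
  have hne4 : PySem.List.max? (l1.map Prod.snd) (fun x : Int => x) ≠ none := by
    rw [Ne, PySem.List.max?_eq_none_iff]; exact hm1'
  obtain ⟨mc1, hmc1⟩ := Option.ne_none_iff_exists'.mp hne4
  -- bounds of the members of either list
  have hbound : ∀ q : Int × Int, q ∈ l1 → mr0 ≤ q.1 ∧ q.1 ≤ mr1 ∧ mc0 ≤ q.2 ∧ q.2 ≤ mc1 := by
    intro q hq
    refine ⟨PySem.List.min?_isMin hmr0 q.1 (List.mem_map.mpr ⟨q, hq, rfl⟩),
      PySem.List.max?_isMax hmr1 q.1 (List.mem_map.mpr ⟨q, hq, rfl⟩),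
      PySem.List.min?_isMin hmc0 q.2 (List.mem_map.mpr ⟨q, hq, rfl⟩),
      PySem.List.max?_isMax hmc1 q.2 (List.mem_map.mpr ⟨q, hq, rfl⟩)⟩
  have hr01 : mr0 ≤ mr1 := by
    obtain ⟨q, hq⟩ := List.exists_mem_of_ne_nil l1 h1
    have := hbound q hq
    omega
  have hc01 : mc0 ≤ mc1 := by
    obtain ⟨q, hq⟩ := List.exists_mem_of_ne_nil l1 h1
    have := hbound q hq
    omega
  unfold pvCrop
  rw [← er0, ← er1, ← ec0, ← ec1]
  simp only [hmr0, hmr1, hmc0, hmc1, Option.getD_some]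
  set R : Nat := (mr1 - mr0 + 1).toNat with hR
  set C : Nat := (mc1 - mc0 + 1).toNat with hC2
  set init : List (List Int) := List.replicate R (List.replicate C 0) with hinit
  have hlenR : init.length = R := by simp [hinit]
  have hrowsC : ∀ a : Nat, a < R → (init.getD a []).length = C := by
    intro a ha
    rw [hinit, List.getD_replicate _ ha, List.length_replicate]
  have hcastR : (R : Int) = mr1 - mr0 + 1 := by omega
  have hcastC : (C : Int) = mc1 - mc0 + 1 := by omega
  have hb1 : ∀ q ∈ l1, mr0 ≤ q.1 ∧ q.1 < mr0 + R ∧ mc0 ≤ q.2 ∧ q.2 < mc0 + C := by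
    intro q hq
    have := hbound q hq
    omega
  have hb2 : ∀ q ∈ l2, mr0 ≤ q.1 ∧ q.1 < mr0 + R ∧ mc0 ≤ q.2 ∧ q.2 < mc0 + C := by
    intro q hq
    have := hbound q ((h q).mpr hq)
    omega
  have key : ∀ a b : Nat,
      (((l1.foldl (fun out q => pvGset out (q.1 - mr0) (q.2 - mc0) (pvAt g q)) init).getD a []).getD b 0) =
      (((l2.foldl (fun out q => pvGset out (q.1 - mr0) (q.2 - mc0) (pvAt g q)) init).getD a []).getD b 0) := by
    intro a b
    rw [pvFill_entry g mr0 mc0 R C l1 init hb1 hlenR hrowsC a b,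
      pvFill_entry g mr0 mc0 R C l2 init hb2 hlenR hrowsC a b]
    exact if_congr (h _) rfl rfl
  have hshape1 := pvFill_shape g mr0 mc0 l1 init
  have hshape2 := pvFill_shape g mr0 mc0 l2 init
  apply List.ext_getElem (by rw [hshape1.1, hshape2.1])
  intro a ha1 ha2
  apply List.ext_getElem
  · have e1 := hshape1.2 a
    have e2 := hshape2.2 a
    rw [List.getD_eq_getElem _ [] ha1] at e1
    rw [List.getD_eq_getElem _ [] ha2] at e2
    rw [e1, e2]
  · intro b hb1' hb2'
    have k := key a b
    rw [List.getD_eq_getElem _ [] ha1, List.getD_eq_getElem _ [] ha2] at k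
    rw [List.getD_eq_getElem _ 0 hb1', List.getD_eq_getElem _ 0 hb2'] at k
    exact k

-- ===== cells as flat indices; connectivity as an abstract relation =====
def pvDec (c : Nat) (x : Nat) : Int × Int := (((x / c : Nat) : Int), ((x % c : Nat) : Int))

-- `s` and `t` lie in the same nonzero same-valued component (seeded at s)
def pvConn (g : List (List Int)) (r c : Nat) (s t : Int × Int) : Prop :=
  pvIn r c s ∧ pvAt g s ≠ 0 ∧ pvReach g r c (pvAt g s) s t

-- `s` is the row-major-minimal cell of its component
def pvRepP (g : List (List Int)) (r c : Nat) (s : Int × Int) : Prop :=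
  pvIn r c s ∧ pvAt g s ≠ 0 ∧ ∀ t, pvConn g r c s t → pvIdx c s ≤ pvIdx c t

-- `reps` is the list of component representatives among the first k cells, in row-major order
def pvRepsOf (g : List (List Int)) (r c : Nat) (k : Nat) (reps : List (Int × Int)) : Prop :=
  reps.Sublist ((List.range k).map (pvDec c)) ∧
  (∀ s ∈ reps, pvRepP g r c s) ∧
  (∀ x, x < k → pvAt g (pvDec c x) ≠ 0 → ∃ s ∈ reps, pvConn g r c s (pvDec c x))

lemma pvGetD_range (n x : Nat) : (List.range n).getD x x = x := by
  by_cases h : x < n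
  · rw [List.getD_eq_getElem _ _ (by simpa using h)]
    simp
  · rw [List.getD_eq_default _ _ (by simpa using Nat.le_of_not_lt h)]

lemma pvIdx_dec (c x : Nat) : pvIdx c (pvDec c x) = x := by
  show (((x / c : Nat) : Int)).toNat * c + (((x % c : Nat) : Int)).toNat = x
  rw [Int.toNat_natCast, Int.toNat_natCast, Nat.mul_comm]
  exact Nat.div_add_mod x c

lemma pvDec_idx (r c : Nat) (t : Int × Int) (ht : pvIn r c t) : pvDec c (pvIdx c t) = t := by
  obtain ⟨h1, h2, h3, h4⟩ := ht
  unfold pvIdx pvDec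
  have hc : 0 < c := by omega
  have hb : t.2.toNat < c := by omega
  have e1 : (t.1.toNat * c + t.2.toNat) / c = t.1.toNat := by
    rw [Nat.mul_comm, Nat.mul_add_div hc, Nat.div_eq_of_lt hb]
    omega
  have e2 : (t.1.toNat * c + t.2.toNat) % c = t.2.toNat := by
    rw [Nat.mul_comm, Nat.mul_add_mod]
    exact Nat.mod_eq_of_lt hb
  rw [e1, e2]
  exact Prod.ext (by omega) (by omega)

lemma pvIdx_lt (r c : Nat) (t : Int × Int) (ht : pvIn r c t) : pvIdx c t < r * c := by
  obtain ⟨h1, h2, h3, h4⟩ := ht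
  unfold pvIdx
  have ha : t.1.toNat + 1 ≤ r := by omega
  have hb : t.2.toNat < c := by omega
  calc t.1.toNat * c + t.2.toNat < t.1.toNat * c + c := by omega
    _ = (t.1.toNat + 1) * c := by ring
    _ ≤ r * c := Nat.mul_le_mul_right c ha

lemma pvDec_in (r c : Nat) (x : Nat) (hc : 0 < c) (hx : x < r * c) : pvIn r c (pvDec c x) := by
  unfold pvDec pvIn
  refine ⟨?_, ?_, ?_, ?_⟩
  · show (0 : Int) ≤ ((x / c : Nat) : Int)
    exact Int.natCast_nonneg _
  · show ((x / c : Nat) : Int) < (r : Int)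
    have : x / c < r := Nat.div_lt_of_lt_mul (by rwa [Nat.mul_comm] at hx)
    exact_mod_cast this
  · show (0 : Int) ≤ ((x % c : Nat) : Int)
    exact Int.natCast_nonneg _
  · show ((x % c : Nat) : Int) < (c : Int)
    exact_mod_cast Nat.mod_lt x hc

lemma pvIdx_inj (r c : Nat) (s t : Int × Int) (hs : pvIn r c s) (ht : pvIn r c t)
    (h : pvIdx c s = pvIdx c t) : s = t := by
  have := congrArg (pvDec c) h
  rwa [pvDec_idx r c s hs, pvDec_idx r c t ht] at this

lemma pvConn_refl (g : List (List Int)) (r c : Nat) (s : Int × Int)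
    (h1 : pvIn r c s) (h2 : pvAt g s ≠ 0) : pvConn g r c s s :=
  ⟨h1, h2, Relation.ReflTransGen.refl⟩

lemma pvConn_props (g : List (List Int)) (r c : Nat) (s t : Int × Int)
    (h : pvConn g r c s t) : pvIn r c t ∧ pvAt g t = pvAt g s := by
  rcases pvReach_prop g r c (pvAt g s) s t h.2.2 with rfl | hh
  · exact ⟨h.1, rfl⟩
  · exact hh

lemma pvConn_symm (g : List (List Int)) (r c : Nat) (s t : Int × Int)
    (h : pvConn g r c s t) : pvConn g r c t s := by
  obtain ⟨htin, htcol⟩ := pvConn_props g r c s t h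
  refine ⟨htin, by rw [htcol]; exact h.2.1, ?_⟩
  rw [htcol]
  exact pvReach_symm g r c (pvAt g s) s t h.1 rfl h.2.2

lemma pvConn_trans (g : List (List Int)) (r c : Nat) (s t u : Int × Int)
    (h1 : pvConn g r c s t) (h2 : pvConn g r c t u) : pvConn g r c s u := by
  obtain ⟨_, htcol⟩ := pvConn_props g r c s t h1
  refine ⟨h1.1, h1.2.1, Relation.ReflTransGen.trans h1.2.2 ?_⟩
  rw [← htcol]
  exact h2.2.2

lemma pvRep_unique (g : List (List Int)) (r c : Nat) (s t : Int × Int)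
    (hs : pvRepP g r c s) (ht : pvRepP g r c t) (h : pvConn g r c s t) : s = t :=
  pvIdx_inj r c s t hs.1 ht.1
    (le_antisymm (hs.2.2 t h) (ht.2.2 s (pvConn_symm g r c s t h)))

lemma pvRepsOf_mem (g : List (List Int)) (r c k : Nat) (reps : List (Int × Int))
    (h : pvRepsOf g r c k reps) (x : Nat) (hx : x < k)
    (hrep : pvRepP g r c (pvDec c x)) : pvDec c x ∈ reps := by
  obtain ⟨s, hs, hconn⟩ := h.2.2 x hx hrep.2.1
  have := pvRep_unique g r c s (pvDec c x) (h.2.1 s hs) hrep hconn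
  rwa [this] at hs

lemma pvSublist_eq_of_mem_iff {α : Type} :
    ∀ (base l1 l2 : List α), base.Nodup → l1.Sublist base → l2.Sublist base →
      (∀ x, x ∈ l1 ↔ x ∈ l2) → l1 = l2 := by
  intro base
  induction base with
  | nil =>
    intro l1 l2 _ h1 h2 _
    rw [List.sublist_nil.mp h1, List.sublist_nil.mp h2]
  | cons b bs ih =>
    intro l1 l2 hnd h1 h2 hmem
    have hndt : bs.Nodup := (List.nodup_cons.mp hnd).2
    have hbn : b ∉ bs := (List.nodup_cons.mp hnd).1
    have hhead : ∀ l : List α, l.Sublist (b :: bs) → b ∈ l → ∃ l', l = b :: l' ∧ l'.Sublist bs := by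
      intro l hl hbl
      rcases List.sublist_cons_iff.mp hl with h | ⟨r, hr, hrs⟩
      · exact absurd (h.subset hbl) hbn
      · subst hr
        rcases List.mem_cons.mp hbl with _ | hbr
        · exact ⟨r, rfl, hrs⟩
        · exact absurd (hrs.subset hbr) hbn
    by_cases hb1 : b ∈ l1
    · have hb2 : b ∈ l2 := (hmem b).mp hb1
      obtain ⟨l1', rfl, hs1⟩ := hhead l1 h1 hb1
      obtain ⟨l2', rfl, hs2⟩ := hhead l2 h2 hb2
      have : l1' = l2' := by
        apply ih l1' l2' hndt hs1 hs2
        intro x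
        by_cases hxb : x = b
        · subst hxb
          constructor
          · intro hx; exact absurd (hs1.subset hx) hbn
          · intro hx; exact absurd (hs2.subset hx) hbn
        · have := hmem x
          simp only [List.mem_cons] at this
          tauto
      rw [this]
    · have hb2 : b ∉ l2 := fun hc => hb1 ((hmem b).mpr hc)
      have hs1 : l1.Sublist bs := by
        rcases List.sublist_cons_iff.mp h1 with h | ⟨r, hr, _⟩
        · exact h
        · subst hr; simp at hb1
      have hs2 : l2.Sublist bs := by
        rcases List.sublist_cons_iff.mp h2 with h | ⟨r, hr, _⟩
        · exact h
        · subst hr; simp at hb2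
      exact ih l1 l2 hndt hs1 hs2 hmem

lemma pvBase_nodup (r c : Nat) (k : Nat) :
    ((List.range k).map (pvDec c)).Nodup := by
  refine (List.nodup_range).map_on ?_
  intro x _ y _ h
  have := congrArg (pvIdx c) h
  rwa [pvIdx_dec, pvIdx_dec] at this

lemma pvRepsOf_unique (g : List (List Int)) (r c k : Nat) (hk : k ≤ r * c) (hc : 0 < c)
    (reps1 reps2 : List (Int × Int))
    (h1 : pvRepsOf g r c k reps1) (h2 : pvRepsOf g r c k reps2) : reps1 = reps2 := by
  apply pvSublist_eq_of_mem_iff ((List.range k).map (pvDec c)) reps1 reps2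
    (pvBase_nodup r c k) h1.1 h2.1
  have key : ∀ (ra rb : List (Int × Int)), pvRepsOf g r c k ra → pvRepsOf g r c k rb →
      ∀ x, x ∈ ra → x ∈ rb := by
    intro ra rb ha hb x hx
    have hxbase : x ∈ (List.range k).map (pvDec c) := ha.1.subset hx
    obtain ⟨i, hi, rfl⟩ := List.mem_map.mp hxbase
    exact pvRepsOf_mem g r c k rb hb i (List.mem_range.mp hi) (ha.2.1 _ hx)
  intro x
  exact ⟨key reps1 reps2 h1 h2 x, key reps2 reps1 h2 h1 x⟩

-- the row-major double loop enumerates exactly the decoded flat indices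
lemma pvCoords_eq (r c : Nat) :
    (List.range r).flatMap (fun (i : Nat) => (List.range c).map (fun (j : Nat) => (((i : Int), (j : Int)) : Int × Int))) =
      (List.range (r * c)).map (pvDec c) := by
  induction r with
  | zero => simp
  | succ r ih =>
    rw [List.range_succ, List.flatMap_append, ih, Nat.succ_mul, List.range_add,
      List.map_append, List.flatMap_singleton]
    congr 1
    rw [List.map_map]
    apply List.map_congr_left
    intro j hj
    have hj' : j < c := List.mem_range.mp hj
    unfold pvDec
    have hc : 0 < c := by omega
    have e1 : (r * c + j) / c = r := by
      rw [Nat.mul_comm r c, Nat.mul_add_div hc, Nat.div_eq_of_lt hj']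
      omega
    have e2 : (r * c + j) % c = j := by
      rw [Nat.mul_comm r c, Nat.mul_add_mod]
      exact Nat.mod_eq_of_lt hj'
    show ((r : Int), (j : Int)) = ((((r * c + j) / c : Nat) : Int), (((r * c + j) % c : Nat) : Int))
    rw [e1, e2]

-- ===== invariant of A's outer scan =====
def pvInvA (g : List (List Int)) (r c : Nat) (k : Nat)
    (st : List (List Bool) × List (List (Int × Int))) (reps : List (Int × Int)) : Prop :=
  pvShape r c st.1 ∧
  (∀ t, pvIn r c t → (pvVget st.1 t = true ↔ ∃ s ∈ reps, pvConn g r c s t)) ∧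
  List.Forall₂ (fun o s => o.Nodup ∧ ∀ t, t ∈ o ↔ pvConn g r c s t) st.2 reps ∧
  pvRepsOf g r c k reps

-- a fresh nonzero cell reached by the scan is its component's representative
lemma pvFreshRep (g : List (List Int)) (r c k : Nat) (reps : List (Int × Int))
    (hk : k < r * c) (hc : 0 < c)
    (hcomp : ∀ x, x < k → pvAt g (pvDec c x) ≠ 0 → ∃ s ∈ reps, pvConn g r c s (pvDec c x))
    (hnz : pvAt g (pvDec c k) ≠ 0)
    (hnov : ¬ ∃ s ∈ reps, pvConn g r c s (pvDec c k)) :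
    pvRepP g r c (pvDec c k) := by
  have hin : pvIn r c (pvDec c k) := pvDec_in r c k hc hk
  refine ⟨hin, hnz, ?_⟩
  intro t hconn
  rw [pvIdx_dec]
  by_contra hlt
  push Not at hlt
  obtain ⟨htin, htcol⟩ := pvConn_props g r c (pvDec c k) t hconn
  have htdec : pvDec c (pvIdx c t) = t := pvDec_idx r c t htin
  obtain ⟨s, hs, hconn2⟩ := hcomp (pvIdx c t) hlt (by rw [htdec, htcol]; exact hnz)
  rw [htdec] at hconn2
  exact hnov ⟨s, hs, pvConn_trans g r c s t (pvDec c k) hconn2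
    (pvConn_symm g r c (pvDec c k) t hconn)⟩

lemma pvForall₂_append {α β : Type} (R : α → β → Prop) {a c : List α} {b d : List β}
    (h1 : List.Forall₂ R a b) (h2 : List.Forall₂ R c d) : List.Forall₂ R (a ++ c) (b ++ d) := by
  induction h1 with
  | nil => exact h2
  | cons hx _ ih => exact List.Forall₂.cons hx ih

lemma pvStepA_inv (g : List (List Int)) (r c k : Nat) (hk : k < r * c) (hc : 0 < c)
    (st : List (List Bool) × List (List (Int × Int))) (reps : List (Int × Int))
    (hinv : pvInvA g r c k st reps) :
    ∃ reps', pvInvA g r c (k + 1) (pvBodyA g r c st (pvDec c k)) reps' := by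
  obtain ⟨hsh, hvis, hf2, hreps⟩ := hinv
  have hin : pvIn r c (pvDec c k) := pvDec_in r c k hc hk
  have hbase : (List.range (k + 1)).map (pvDec c) =
      (List.range k).map (pvDec c) ++ [pvDec c k] := by
    rw [List.range_succ, List.map_append]
    rfl
  by_cases hg : pvVget st.1 (pvDec c k) = false ∧ pvAt g (pvDec c k) ≠ 0
  · -- fresh nonzero cell: a new component is collected
    have hnov : ¬ ∃ s ∈ reps, pvConn g r c s (pvDec c k) := by
      intro hcon
      have := (hvis (pvDec c k) hin).mpr hcon
      rw [hg.1] at this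
      exact absurd this (by decide)
    have hrep : pvRepP g r c (pvDec c k) := pvFreshRep g r c k reps hk hc hreps.2.2 hg.2 hnov
    have hext : ∀ t, pvIn r c t → pvVget st.1 t = true →
        ¬ pvReach g r c (pvAt g (pvDec c k)) (pvDec c k) t := by
      intro t htin hvt hre
      obtain ⟨s, hs, hconn⟩ := (hvis t htin).mp hvt
      exact hnov ⟨s, hs, pvConn_trans g r c s t (pvDec c k) hconn
        (pvConn_symm g r c (pvDec c k) t ⟨hin, hg.2, hre⟩)⟩
    obtain ⟨B1, B2, B3, B4⟩ := pvBfsRun g r c (pvAt g (pvDec c k)) (pvDec c k) st.1 hsh hin rfl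
      hg.1 hext
    have hpres : pvDec c k ∈ (pvBfsLoop g r c (pvAt g (pvDec c k)) (r * c + 1) [pvDec c k]
        (pvVset st.1 (pvDec c k)) []).1 := (B4 (pvDec c k)).mpr Relation.ReflTransGen.refl
    have hne : (pvBfsLoop g r c (pvAt g (pvDec c k)) (r * c + 1) [pvDec c k]
        (pvVset st.1 (pvDec c k)) []).1 ≠ [] := List.ne_nil_of_mem hpres
    have hbody : pvBodyA g r c st (pvDec c k) =
        ((pvBfsLoop g r c (pvAt g (pvDec c k)) (r * c + 1) [pvDec c k]
            (pvVset st.1 (pvDec c k)) []).2,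
         st.2 ++ [(pvBfsLoop g r c (pvAt g (pvDec c k)) (r * c + 1) [pvDec c k]
            (pvVset st.1 (pvDec c k)) []).1]) := by
      unfold pvBodyA
      rw [if_pos hg]
      show ((pvBfsLoop g r c (pvAt g (pvDec c k)) (r * c + 1) [pvDec c k]
          (pvVset st.1 (pvDec c k)) []).2,
        if (pvBfsLoop g r c (pvAt g (pvDec c k)) (r * c + 1) [pvDec c k]
            (pvVset st.1 (pvDec c k)) []).1 = [] then st.2
        else st.2 ++ [(pvBfsLoop g r c (pvAt g (pvDec c k)) (r * c + 1) [pvDec c k]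
            (pvVset st.1 (pvDec c k)) []).1]) = _
      rw [if_neg hne]
    rw [hbody]
    refine ⟨reps ++ [pvDec c k], B1, ?_, ?_, ?_, ?_, ?_⟩
    · -- visited characterisation
      intro t htin
      rw [B2 t htin, hvis t htin]
      constructor
      · rintro (⟨s, hs, hconn⟩ | hmem)
        · exact ⟨s, List.mem_append.mpr (Or.inl hs), hconn⟩
        · exact ⟨pvDec c k, List.mem_append.mpr (Or.inr (by simp)),
            ⟨hin, hg.2, (B4 t).mp hmem⟩⟩
      · rintro ⟨s, hs, hconn⟩
        rcases List.mem_append.mp hs with hs | hs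
        · exact Or.inl ⟨s, hs, hconn⟩
        · have : s = pvDec c k := by simpa using hs
          subst this
          exact Or.inr ((B4 t).mpr hconn.2.2)
    · -- objects ↔ representatives
      refine pvForall₂_append _ hf2 (List.Forall₂.cons ⟨B3, ?_⟩ List.Forall₂.nil)
      intro t
      rw [B4 t]
      constructor
      · intro hre
        exact ⟨hin, hg.2, hre⟩
      · intro hco
        exact hco.2.2
    · rw [hbase]
      exact List.Sublist.append hreps.1 (List.Sublist.refl _)
    · intro s hs
      rcases List.mem_append.mp hs with hs | hs
      · exact hreps.2.1 s hs
      · have : s = pvDec c k := by simpa using hs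
        subst this
        exact hrep
    · intro x hx hnz
      rcases Nat.lt_succ_iff_lt_or_eq.mp hx with hx' | rfl
      · obtain ⟨s, hs, hconn⟩ := hreps.2.2 x hx' hnz
        exact ⟨s, List.mem_append.mpr (Or.inl hs), hconn⟩
      · exact ⟨pvDec c x, List.mem_append.mpr (Or.inr (by simp)),
          pvConn_refl g r c (pvDec c x) hin hnz⟩
  · -- already visited or zero cell: the state is unchanged
    have hbody : pvBodyA g r c st (pvDec c k) = st := by
      unfold pvBodyA
      rw [if_neg hg]
    rw [hbody]
    refine ⟨reps, hsh, hvis, hf2, ?_, hreps.2.1, ?_⟩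
    · exact hreps.1.trans (by rw [hbase]; exact List.sublist_append_left _ _)
    · intro x hx hnz
      rcases Nat.lt_succ_iff_lt_or_eq.mp hx with hx' | rfl
      · exact hreps.2.2 x hx' hnz
      · have hvt : pvVget st.1 (pvDec c x) = true := by
          by_cases hb : pvVget st.1 (pvDec c x) = false
          · exact absurd ⟨hb, hnz⟩ hg
          · exact Bool.ne_false_iff.mp hb
        exact (hvis (pvDec c x) hin).mp hvt

lemma pvFoldA_run (g : List (List Int)) (r c : Nat) (hc : 0 < c) :
    ∀ k, k ≤ r * c → ∃ reps, pvInvA g r c k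
      (((List.range k).map (pvDec c)).foldl (pvBodyA g r c)
        (List.replicate r (List.replicate c false), [])) reps := by
  intro k
  induction k with
  | zero =>
    intro _
    simp only [List.range_zero, List.map_nil, List.foldl_nil]
    refine ⟨[], ⟨⟨List.length_replicate, ?_⟩, ?_, List.Forall₂.nil, ?_, ?_, ?_⟩⟩
    · intro row hrow
      rw [List.eq_of_mem_replicate hrow]
      exact List.length_replicate
    · intro t _
      rw [pvVget_replicate]
      simp
    · simp
    · simp
    · simp
  | succ k ih =>
    intro hk
    obtain ⟨reps, hinv⟩ := ih (by omega)
    rw [List.range_succ, List.map_append, List.foldl_append]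
    exact pvStepA_inv g r c k (by omega) hc _ reps hinv

-- ===== union-find: the parent array =====
def pvUFinv (g : List (List Int)) (r c : Nat) (par : List Nat) : Prop :=
  par.length = r * c ∧ (∀ x, par.getD x x ≤ x) ∧
  (∀ x, x < r * c → par.getD x x = x ∨
    (pvAt g (pvDec c x) ≠ 0 ∧ pvConn g r c (pvDec c x) (pvDec c (par.getD x x))))

lemma pvPg_set (par : List Nat) (hi lo : Nat) (hhi : hi < par.length) (y : Nat) :
    (par.set hi lo).getD y y = if y = hi then lo else par.getD y y := by
  by_cases h : y = hi
  · subst h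
    simp only [List.getD_eq_getElem?_getD, List.getElem?_set_self hhi, Option.getD_some]
    simp
  · simp only [List.getD_eq_getElem?_getD, List.getElem?_set_ne (fun hc => h hc.symm), if_neg h]

lemma ufFind_le (par : List Nat) (h : ∀ x, par.getD x x ≤ x) :
    ∀ x f, x < f → ufFind par f x ≤ x := by
  intro x
  induction x using Nat.strong_induction_on with
  | _ x ih =>
    intro f hf
    obtain ⟨f', rfl⟩ : ∃ f0, f = f0 + 1 := ⟨f - 1, by omega⟩
    show (if par.getD x x = x then x else ufFind par f' (par.getD x x)) ≤ x
    by_cases hr : par.getD x x = x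
    · rw [if_pos hr]
    · rw [if_neg hr]
      have hlt : par.getD x x < x := lt_of_le_of_ne (h x) hr
      exact le_trans (ih _ hlt f' (by omega)) (by omega)

lemma ufFind_root (par : List Nat) (h : ∀ x, par.getD x x ≤ x) :
    ∀ x f, x < f → par.getD (ufFind par f x) (ufFind par f x) = ufFind par f x := by
  intro x
  induction x using Nat.strong_induction_on with
  | _ x ih =>
    intro f hf
    obtain ⟨f', rfl⟩ : ∃ f0, f = f0 + 1 := ⟨f - 1, by omega⟩
    have e : ufFind par (f' + 1) x = if par.getD x x = x then x else ufFind par f' (par.getD x x) := rfl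
    rw [e]
    by_cases hr : par.getD x x = x
    · rw [if_pos hr]
      exact hr
    · rw [if_neg hr]
      have hlt : par.getD x x < x := lt_of_le_of_ne (h x) hr
      exact ih _ hlt f' (by omega)

lemma ufFind_conn (g : List (List Int)) (r c : Nat) (par : List Nat) (hc : 0 < c)
    (hinv : pvUFinv g r c par) :
    ∀ x, x < r * c → pvAt g (pvDec c x) ≠ 0 →
      ∀ f, x < f → pvConn g r c (pvDec c x) (pvDec c (ufFind par f x)) := by
  obtain ⟨hlen, hle, hcls⟩ := hinv
  intro x
  induction x using Nat.strong_induction_on with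
  | _ x ih =>
    intro hx hnz f hf
    obtain ⟨f', rfl⟩ : ∃ f0, f = f0 + 1 := ⟨f - 1, by omega⟩
    show pvConn g r c (pvDec c x) (pvDec c (if par.getD x x = x then x else ufFind par f' (par.getD x x)))
    by_cases hr : par.getD x x = x
    · rw [if_pos hr]
      exact pvConn_refl g r c (pvDec c x) (pvDec_in r c x hc hx) hnz
    · rw [if_neg hr]
      have hlt : par.getD x x < x := lt_of_le_of_ne (hle x) hr
      rcases hcls x hx with h | ⟨_, hconn⟩
      · exact absurd h hr
      · have hnz' : pvAt g (pvDec c (par.getD x x)) ≠ 0 := by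
          have := (pvConn_props g r c _ _ hconn).2
          rw [this]
          exact hnz
        exact pvConn_trans g r c _ _ _ hconn
          (ih _ hlt (by omega) hnz' f' (by omega))

lemma ufFind_set (par : List Nat) (h : ∀ x, par.getD x x ≤ x) (lo hi : Nat)
    (hlh : lo < hi) (hhi : hi < par.length)
    (hroot_lo : par.getD lo lo = lo) (hroot_hi : par.getD hi hi = hi) :
    ∀ x f, x < f → ufFind (par.set hi lo) f x =
      if ufFind par f x = hi then lo else ufFind par f x := by
  intro x
  induction x using Nat.strong_induction_on with
  | _ x ih =>
    intro f hf
    obtain ⟨f', rfl⟩ : ∃ f0, f = f0 + 1 := ⟨f - 1, by omega⟩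
    have e2 : ufFind (par.set hi lo) (f' + 1) x =
        if (par.set hi lo).getD x x = x then x
        else ufFind (par.set hi lo) f' ((par.set hi lo).getD x x) := rfl
    have e3 : ufFind par (f' + 1) x =
        if par.getD x x = x then x else ufFind par f' (par.getD x x) := rfl
    by_cases hxhi : x = hi
    · subst hxhi
      have hpg' : (par.set x lo).getD x x = lo := by rw [pvPg_set par x lo hhi]; simp
      rw [e2, hpg', if_neg (by omega), e3, hroot_hi, if_pos rfl, if_pos rfl]
      -- the walk from lo in the new array stops immediately: lo is still a root
      obtain ⟨f'', rfl⟩ : ∃ f0, f' = f0 + 1 := ⟨f' - 1, by omega⟩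
      have hpglo : (par.set x lo).getD lo lo = lo := by
        rw [pvPg_set par x lo hhi, if_neg (by omega)]
        exact hroot_lo
      show (if (par.set x lo).getD lo lo = lo then lo
        else ufFind (par.set x lo) f'' ((par.set x lo).getD lo lo)) = lo
      rw [if_pos hpglo]
    · have hpg' : (par.set hi lo).getD x x = par.getD x x := by
        rw [pvPg_set par hi lo hhi, if_neg hxhi]
      by_cases hr : par.getD x x = x
      · rw [e2, hpg', if_pos hr, e3, if_pos hr, if_neg hxhi]
      · have hlt : par.getD x x < x := lt_of_le_of_ne (h x) hr
        rw [e2, hpg', if_neg hr, e3, if_neg hr]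
        exact ih _ hlt f' (by omega)

-- ===== invariant of B's union pass =====
def pvInvU (g : List (List Int)) (r c : Nat) (k : Nat) (par : List Nat) : Prop :=
  pvUFinv g r c par ∧
  ∀ x, x < k → pvAt g (pvDec c x) ≠ 0 →
    ∀ q ∈ [(((pvDec c x).1, (pvDec c x).2 + 1) : Int × Int), ((pvDec c x).1 + 1, (pvDec c x).2)],
      q.1 < (r : Int) ∧ q.2 < (c : Int) ∧ pvAt g q = pvAt g (pvDec c x) →
      ufFind par (r * c + 1) x = ufFind par (r * c + 1) (pvIdx c q)

-- one neighbour step of the union pass: the guarded union of p with q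
def pvUStep (g : List (List Int)) (r c : Nat) (par : List Nat) (p q : Int × Int) : List Nat :=
  if q.1 < (r : Int) ∧ q.2 < (c : Int) ∧ pvAt g q = pvAt g p then
    let ra := ufFind par (r * c + 1) (pvIdx c p)
    let rb := ufFind par (r * c + 1) (pvIdx c q)
    if ra ≠ rb then (if rb < ra then par.set ra rb else par.set rb ra) else par
  else par

lemma pvUnionSub (g : List (List Int)) (r c : Nat) (par : List Nat) (p q : Int × Int)
    (hUF : pvUFinv g r c par) (hp : pvIn r c p) (hnzp : pvAt g p ≠ 0)
    (hq0 : 0 ≤ q.1 ∧ 0 ≤ q.2)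
    (hadj : (q.1 < (r : Int) ∧ q.2 < (c : Int) ∧ pvAt g q = pvAt g p) → pvConn g r c p q) :
    pvUFinv g r c (pvUStep g r c par p q) ∧
    (∀ a b, a < r * c → b < r * c → ufFind par (r * c + 1) a = ufFind par (r * c + 1) b →
      ufFind (pvUStep g r c par p q) (r * c + 1) a = ufFind (pvUStep g r c par p q) (r * c + 1) b) ∧
    ((q.1 < (r : Int) ∧ q.2 < (c : Int) ∧ pvAt g q = pvAt g p) →
      ufFind (pvUStep g r c par p q) (r * c + 1) (pvIdx c p) =
        ufFind (pvUStep g r c par p q) (r * c + 1) (pvIdx c q)) := by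
  by_cases hg : q.1 < (r : Int) ∧ q.2 < (c : Int) ∧ pvAt g q = pvAt g p
  case neg =>
    have e : pvUStep g r c par p q = par := by unfold pvUStep; rw [if_neg hg]
    rw [e]
    exact ⟨hUF, fun a b _ _ h => h, fun hcon => absurd hcon hg⟩
  case pos =>
    have hconn := hadj hg
    have hqin : pvIn r c q := ⟨hq0.1, hg.1, hq0.2, hg.2.1⟩
    have hnzq : pvAt g q ≠ 0 := by rw [hg.2.2]; exact hnzp
    obtain ⟨hlen, hle, hcls⟩ := hUF
    have hc : 0 < c := by obtain ⟨_, _, h3, h4⟩ := hp; omega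
    have hpa : pvIdx c p < r * c := pvIdx_lt r c p hp
    have hqa : pvIdx c q < r * c := pvIdx_lt r c q hqin
    set ra := ufFind par (r * c + 1) (pvIdx c p) with hra
    set rb := ufFind par (r * c + 1) (pvIdx c q) with hrb
    have hra_le : ra ≤ pvIdx c p := ufFind_le par hle _ _ (by omega)
    have hrb_le : rb ≤ pvIdx c q := ufFind_le par hle _ _ (by omega)
    have hroot_ra : par.getD ra ra = ra := ufFind_root par hle _ _ (by omega)
    have hroot_rb : par.getD rb rb = rb := ufFind_root par hle _ _ (by omega)
    have hconn_ra : pvConn g r c p (pvDec c ra) := by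
      have := ufFind_conn g r c par hc ⟨hlen, hle, hcls⟩ (pvIdx c p) hpa
        (by rw [pvDec_idx r c p hp]; exact hnzp) (r * c + 1) (by omega)
      rwa [pvDec_idx r c p hp] at this
    have hconn_rb : pvConn g r c q (pvDec c rb) := by
      have := ufFind_conn g r c par hc ⟨hlen, hle, hcls⟩ (pvIdx c q) hqa
        (by rw [pvDec_idx r c q hqin]; exact hnzq) (r * c + 1) (by omega)
      rwa [pvDec_idx r c q hqin] at this
    have hconn_ab : pvConn g r c (pvDec c ra) (pvDec c rb) :=
      pvConn_trans g r c _ p _ (pvConn_symm g r c p _ hconn_ra)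
        (pvConn_trans g r c p q _ hconn hconn_rb)
    have hnz_ra : pvAt g (pvDec c ra) ≠ 0 := by
      rw [(pvConn_props g r c p _ hconn_ra).2]
      exact hnzp
    have hnz_rb : pvAt g (pvDec c rb) ≠ 0 := by
      rw [(pvConn_props g r c q _ hconn_rb).2]
      exact hnzq
    have e0 : pvUStep g r c par p q =
        (if ra ≠ rb then (if rb < ra then par.set ra rb else par.set rb ra) else par) := by
      unfold pvUStep
      rw [if_pos hg]
    by_cases hne : ra ≠ rb
    case neg =>
      have e : pvUStep g r c par p q = par := by rw [e0, if_neg hne]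
      rw [e]
      refine ⟨⟨hlen, hle, hcls⟩, fun a b _ _ h => h, fun _ => ?_⟩
      rw [← hra, ← hrb]
      omega
    case pos =>
      by_cases hba : rb < ra
      · -- re-parent ra onto rb
        have e : pvUStep g r c par p q = par.set ra rb := by rw [e0, if_pos hne, if_pos hba]
        rw [e]
        have hhi : ra < par.length := by rw [hlen]; omega
        have key := ufFind_set par hle rb ra hba hhi hroot_rb hroot_ra
        refine ⟨⟨by rw [List.length_set, hlen], ?_, ?_⟩, ?_, ?_⟩
        · intro x
          rw [pvPg_set par ra rb hhi]
          by_cases hx : x = ra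
          · rw [if_pos hx]; omega
          · rw [if_neg hx]; exact hle x
        · intro x hx
          rw [pvPg_set par ra rb hhi]
          by_cases hx2 : x = ra
          · subst hx2
            rw [if_pos rfl]
            exact Or.inr ⟨hnz_ra, hconn_ab⟩
          · rw [if_neg hx2]
            exact hcls x hx
        · intro a b ha hb heq
          rw [key a (r * c + 1) (by omega), key b (r * c + 1) (by omega), heq]
        · intro _
          rw [key (pvIdx c p) (r * c + 1) (by omega), key (pvIdx c q) (r * c + 1) (by omega),
            ← hra, ← hrb, if_pos rfl, if_neg (by omega)]
      · -- re-parent rb onto ra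
        have hab : ra < rb := by omega
        have e : pvUStep g r c par p q = par.set rb ra := by rw [e0, if_pos hne, if_neg hba]
        rw [e]
        have hhi : rb < par.length := by rw [hlen]; omega
        have key := ufFind_set par hle ra rb hab hhi hroot_ra hroot_rb
        refine ⟨⟨by rw [List.length_set, hlen], ?_, ?_⟩, ?_, ?_⟩
        · intro x
          rw [pvPg_set par rb ra hhi]
          by_cases hx : x = rb
          · rw [if_pos hx]; omega
          · rw [if_neg hx]; exact hle x
        · intro x hx
          rw [pvPg_set par rb ra hhi]
          by_cases hx2 : x = rb
          · subst hx2
            rw [if_pos rfl]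
            exact Or.inr ⟨hnz_rb, pvConn_symm g r c _ _ hconn_ab⟩
          · rw [if_neg hx2]
            exact hcls x hx
        · intro a b ha hb heq
          rw [key a (r * c + 1) (by omega), key b (r * c + 1) (by omega), heq]
        · intro _
          rw [key (pvIdx c p) (r * c + 1) (by omega), key (pvIdx c q) (r * c + 1) (by omega),
            ← hra, ← hrb, if_neg (by omega), if_pos rfl]

lemma pvStepU_inv (g : List (List Int)) (r c k : Nat) (hk : k < r * c) (hc : 0 < c)
    (par : List Nat) (hinv : pvInvU g r c k par) :
    pvInvU g r c (k + 1) (pvUnionCell g r c par (pvDec c k)) := by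
  obtain ⟨hUF, hold⟩ := hinv
  have hin : pvIn r c (pvDec c k) := pvDec_in r c k hc hk
  have hidxk : pvIdx c (pvDec c k) = k := pvIdx_dec c k
  unfold pvUnionCell
  by_cases hz : pvAt g (pvDec c k) = 0
  · rw [if_pos hz]
    refine ⟨hUF, ?_⟩
    intro x hx hnz q hq hcond
    rcases Nat.lt_succ_iff_lt_or_eq.mp hx with hx' | rfl
    · exact hold x hx' hnz q hq hcond
    · exact absurd hz hnz
  · rw [if_neg hz]
    show pvInvU g r c (k + 1)
      (pvUStep g r c (pvUStep g r c par (pvDec c k) ((pvDec c k).1, (pvDec c k).2 + 1))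
        (pvDec c k) ((pvDec c k).1 + 1, (pvDec c k).2))
    have hq0 : (0 : Int) ≤ (pvDec c k).1 ∧ (0 : Int) ≤ (pvDec c k).2 := ⟨hin.1, hin.2.2.1⟩
    have hS1 := pvUnionSub g r c par (pvDec c k) ((pvDec c k).1, (pvDec c k).2 + 1) hUF hin hz
      ⟨hq0.1, by have := hq0.2; omega⟩
      (by
        intro hg
        refine ⟨hin, hz, Relation.ReflTransGen.single ?_⟩
        refine ⟨⟨hq0.1, hg.1, by have := hq0.2; omega, hg.2.1⟩,
          ⟨(0, 1), by simp [pvDirs], ?_⟩, hg.2.2⟩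
        refine Prod.ext ?_ ?_ <;> simp)
    obtain ⟨hUF1, hpres1, hnew1⟩ := hS1
    have hS2 := pvUnionSub g r c _ (pvDec c k) ((pvDec c k).1 + 1, (pvDec c k).2) hUF1 hin hz
      ⟨by have := hq0.1; omega, hq0.2⟩
      (by
        intro hg
        refine ⟨hin, hz, Relation.ReflTransGen.single ?_⟩
        refine ⟨⟨by have := hq0.1; omega, hg.1, hq0.2, hg.2.1⟩,
          ⟨(1, 0), by simp [pvDirs], ?_⟩, hg.2.2⟩
        refine Prod.ext ?_ ?_ <;> simp)
    obtain ⟨hUF2, hpres2, hnew2⟩ := hS2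
    refine ⟨hUF2, ?_⟩
    intro x hx hnz q hq hcond
    have hqin : pvIn r c q := by
      have hnb : q = ((pvDec c x).1, (pvDec c x).2 + 1) ∨ q = ((pvDec c x).1 + 1, (pvDec c x).2) := by
        simpa using hq
      have hx0 : (0 : Int) ≤ (pvDec c x).1 ∧ (0 : Int) ≤ (pvDec c x).2 :=
        ⟨Int.natCast_nonneg _, Int.natCast_nonneg _⟩
      rcases hnb with rfl | rfl
      · exact ⟨hx0.1, hcond.1, by have := hx0.2; omega, hcond.2.1⟩
      · exact ⟨by have := hx0.1; omega, hcond.1, hx0.2, hcond.2.1⟩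
    have hqlt : pvIdx c q < r * c := pvIdx_lt r c q hqin
    rcases Nat.lt_succ_iff_lt_or_eq.mp hx with hx' | rfl
    · exact hpres2 x (pvIdx c q) (by omega) hqlt
        (hpres1 x (pvIdx c q) (by omega) hqlt (hold x hx' hnz q hq hcond))
    · rcases (by simpa using hq :
          q = ((pvDec c x).1, (pvDec c x).2 + 1) ∨ q = ((pvDec c x).1 + 1, (pvDec c x).2)) with rfl | rfl
      · have h1 := hnew1 hcond
        rw [hidxk] at h1
        exact hpres2 x (pvIdx c _) (by omega) hqlt h1
      · have h2 := hnew2 hcond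
        rw [hidxk] at h2
        exact h2

lemma pvFoldU_run (g : List (List Int)) (r c : Nat) (hc : 0 < c) :
    pvInvU g r c (r * c)
      (((List.range (r * c)).map (pvDec c)).foldl (fun par p => pvUnionCell g r c par p)
        (List.range (r * c))) := by
  suffices h : ∀ k, k ≤ r * c → pvInvU g r c k
      (((List.range k).map (pvDec c)).foldl (fun par p => pvUnionCell g r c par p)
        (List.range (r * c))) by
    exact h (r * c) le_rfl
  intro k
  induction k with
  | zero =>
    intro _
    simp only [List.range_zero, List.map_nil, List.foldl_nil]
    refine ⟨⟨List.length_range, ?_, ?_⟩, ?_⟩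
    · intro x
      rw [pvGetD_range]
    · intro x hx
      left
      rw [pvGetD_range]
    · intro x hx
      omega
  | succ k ih =>
    intro hk
    rw [List.range_succ, List.map_append, List.foldl_append]
    exact pvStepU_inv g r c k (by omega) hc _ (ih (by omega))

-- final union-find facts: same root iff same component
lemma pvConn_find_eq (g : List (List Int)) (r c : Nat) (par : List Nat)
    (hinv : pvInvU g r c (r * c) par) (s t : Int × Int) (hconn : pvConn g r c s t) :
    ufFind par (r * c + 1) (pvIdx c s) = ufFind par (r * c + 1) (pvIdx c t) := by
  obtain ⟨hsin, hnzs, hreach⟩ := hconn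
  induction hreach with
  | refl => rfl
  | @tail b u hab hadj ih =>
    have hb : pvIn r c b ∧ pvAt g b = pvAt g s := by
      rcases pvReach_prop g r c (pvAt g s) s b hab with rfl | hh
      · exact ⟨hsin, rfl⟩
      · exact hh
    have hu : pvIn r c u := hadj.1
    have hucol : pvAt g u = pvAt g s := hadj.2.2
    have hnzb : pvAt g b ≠ 0 := by rw [hb.2]; exact hnzs
    have hnzu : pvAt g u ≠ 0 := by rw [hucol]; exact hnzs
    obtain ⟨d, hd, hu_eq⟩ := hadj.2.1
    have fwd : ∀ v w : Int × Int, pvIn r c v → pvIn r c w → pvAt g v ≠ 0 →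
        pvAt g w = pvAt g v →
        (w = (v.1, v.2 + 1) ∨ w = (v.1 + 1, v.2)) →
        ufFind par (r * c + 1) (pvIdx c v) = ufFind par (r * c + 1) (pvIdx c w) := by
      intro v w hv hw hnzv hcolw hshape
      have hdec : pvDec c (pvIdx c v) = v := pvDec_idx r c v hv
      have H := hinv.2 (pvIdx c v) (pvIdx_lt r c v hv)
      rw [hdec] at H
      have H2 := H hnzv w (by
        rcases hshape with rfl | rfl
        · simp
        · simp)
        ⟨hw.2.1, hw.2.2.2, hcolw⟩
      exact H2
    have key : ufFind par (r * c + 1) (pvIdx c b) = ufFind par (r * c + 1) (pvIdx c u) := by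
      have hbcol_u : pvAt g u = pvAt g b := by rw [hucol, hb.2]
      have hbcol_b : pvAt g b = pvAt g u := hbcol_u.symm
      simp only [pvDirs, List.mem_cons, List.not_mem_nil, or_false] at hd
      rcases hd with rfl | rfl | rfl | rfl
      · -- d = (-1, 0): b = (u.1 + 1, u.2)
        exact (fwd u b hu hb.1 hnzu hbcol_b (Or.inr (by
          rw [hu_eq]
          refine Prod.ext ?_ ?_ <;> simp))).symm
      · -- d = (1, 0): u = (b.1 + 1, b.2)
        exact fwd b u hb.1 hu hnzb hbcol_u (Or.inr (by
          rw [hu_eq]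
          refine Prod.ext ?_ ?_ <;> simp))
      · -- d = (0, -1): b = (u.1, u.2 + 1)
        exact (fwd u b hu hb.1 hnzu hbcol_b (Or.inl (by
          rw [hu_eq]
          refine Prod.ext ?_ ?_ <;> simp))).symm
      · -- d = (0, 1): u = (b.1, b.2 + 1)
        exact fwd b u hb.1 hu hnzb hbcol_u (Or.inl (by
          rw [hu_eq]
          refine Prod.ext ?_ ?_ <;> simp))
    exact ih.trans key

lemma pvFind_eq_conn (g : List (List Int)) (r c : Nat) (par : List Nat)
    (hinv : pvUFinv g r c par) (s t : Int × Int)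
    (hs : pvIn r c s) (ht : pvIn r c t) (hnzs : pvAt g s ≠ 0) (hnzt : pvAt g t ≠ 0)
    (h : ufFind par (r * c + 1) (pvIdx c s) = ufFind par (r * c + 1) (pvIdx c t)) :
    pvConn g r c s t := by
  have hc : 0 < c := by
    obtain ⟨_, _, h3, h4⟩ := hs
    omega
  have hfs := ufFind_conn g r c par hc hinv (pvIdx c s) (pvIdx_lt r c s hs)
    (by rw [pvDec_idx r c s hs]; exact hnzs) (r * c + 1) (by have := pvIdx_lt r c s hs; omega)
  have hft := ufFind_conn g r c par hc hinv (pvIdx c t) (pvIdx_lt r c t ht)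
    (by rw [pvDec_idx r c t ht]; exact hnzt) (r * c + 1) (by have := pvIdx_lt r c t ht; omega)
  rw [pvDec_idx r c s hs] at hfs
  rw [pvDec_idx r c t ht] at hft
  rw [h] at hfs
  exact pvConn_trans g r c s _ t hfs (pvConn_symm g r c t _ hft)

lemma pvForall₂_comp {α β γ : Type} (P : α → γ → Prop) (Q : β → γ → Prop) :
    ∀ {as : List α} {bs : List β} {cs : List γ}, List.Forall₂ P as cs → List.Forall₂ Q bs cs →
      List.Forall₂ (fun a b => ∃ x, P a x ∧ Q b x) as bs := by
  intro as bs cs h1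
  induction h1 generalizing bs with
  | nil =>
    intro h2
    cases h2
    exact List.Forall₂.nil
  | cons hx _ ih =>
    intro h2
    cases h2 with
    | cons hy hys => exact List.Forall₂.cons ⟨_, hx, hy⟩ (ih hys)


lemma pvForall₂_mem_left {α β : Type} (R : α → β → Prop) :
    ∀ {as : List α} {bs : List β}, List.Forall₂ R as bs → ∀ a ∈ as, ∃ b ∈ bs, R a b := by
  intro as bs h
  induction h with
  | nil => intro a ha; simp at ha
  | cons hx _ ih =>
    intro a ha
    rcases List.mem_cons.mp ha with rfl | ha
    · exact ⟨_, List.mem_cons_self, hx⟩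
    · obtain ⟨b, hb, hr⟩ := ih a ha
      exact ⟨b, List.mem_cons_of_mem _ hb, hr⟩


lemma pvForall₂_mem_right {α β : Type} (R : α → β → Prop) :
    ∀ {as : List α} {bs : List β}, List.Forall₂ R as bs → ∀ b ∈ bs, ∃ a ∈ as, R a b := by
  intro as bs h
  induction h with
  | nil => intro b hb; simp at hb
  | cons hx _ ih =>
    intro b hb
    rcases List.mem_cons.mp hb with rfl | hb
    · exact ⟨_, List.mem_cons_self, hx⟩
    · obtain ⟨a, ha, hr⟩ := ih b hb
      exact ⟨a, List.mem_cons_of_mem _ ha, hr⟩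


lemma pvForall₂_imp_mem {α β : Type} (R S : α → β → Prop) :
    ∀ {as : List α} {bs : List β}, List.Forall₂ R as bs →
      (∀ a b, a ∈ as → b ∈ bs → R a b → S a b) → List.Forall₂ S as bs := by
  intro as bs h
  induction h with
  | nil => intro _; exact List.Forall₂.nil
  | cons hx htl ih =>
    intro himp
    refine List.Forall₂.cons (himp _ _ List.mem_cons_self List.mem_cons_self hx) ?_
    exact ih (fun a b ha hb hr => himp a b (List.mem_cons_of_mem _ ha) (List.mem_cons_of_mem _ hb) hr)


-- ===== invariant of B's bucketing pass =====
def pvInvB (g : List (List Int)) (r c : Nat) (par : List Nat) (k : Nat)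
    (d : PySem.Dict Nat (List (Int × Int))) (reps : List (Int × Int)) : Prop :=
  List.Forall₂ (fun (kv : Nat × List (Int × Int)) s =>
      kv.1 = ufFind par (r * c + 1) (pvIdx c s) ∧ kv.2.Nodup ∧
      ∀ t, t ∈ kv.2 ↔ (pvIdx c t < k ∧ pvConn g r c s t)) d.items reps ∧
  d.keys.Nodup ∧ pvRepsOf g r c k reps

lemma pvNodup_snoc {α : Type} (l : List α) (p : α) (hnd : l.Nodup) (hp : p ∉ l) :
    (l ++ [p]).Nodup := by
  induction l with
  | nil => exact List.nodup_singleton p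
  | cons x xs ih =>
    rw [List.cons_append, List.nodup_cons]
    refine ⟨?_, ih (List.nodup_cons.mp hnd).2 (fun hc => hp (List.mem_cons_of_mem _ hc))⟩
    intro hcon
    rcases List.mem_append.mp hcon with h | h
    · exact (List.nodup_cons.mp hnd).1 h
    · have : x = p := by simpa using h
      subst this
      exact hp List.mem_cons_self

lemma pvStepB_inv (g : List (List Int)) (r c k : Nat) (hk : k < r * c) (hc : 0 < c)
    (par : List Nat) (hU : pvInvU g r c (r * c) par)
    (d : PySem.Dict Nat (List (Int × Int))) (reps : List (Int × Int))
    (hinv : pvInvB g r c par k d reps) :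
    ∃ reps', pvInvB g r c par (k + 1) (pvBodyB g r c par d (pvDec c k)) reps' := by
  obtain ⟨hf2, hknd, hreps⟩ := hinv
  have hUF : pvUFinv g r c par := hU.1
  have hin : pvIn r c (pvDec c k) := pvDec_in r c k hc hk
  have hidxk : pvIdx c (pvDec c k) = k := pvIdx_dec c k
  have hbase : (List.range (k + 1)).map (pvDec c) =
      (List.range k).map (pvDec c) ++ [pvDec c k] := by
    rw [List.range_succ, List.map_append]
    rfl
  by_cases hz : pvAt g (pvDec c k) = 0
  · -- zero cell: nothing happens
    have hbody : pvBodyB g r c par d (pvDec c k) = d := by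
      unfold pvBodyB
      rw [if_neg (by simpa using hz)]
    rw [hbody]
    refine ⟨reps, ?_, hknd, ?_, hreps.2.1, ?_⟩
    · refine List.Forall₂.imp ?_ hf2
      intro kv s hR
      refine ⟨hR.1, hR.2.1, ?_⟩
      intro t
      rw [hR.2.2 t]
      constructor
      · rintro ⟨hlt, hC⟩
        exact ⟨by omega, hC⟩
      · rintro ⟨hlt, hC⟩
        refine ⟨?_, hC⟩
        rcases Nat.lt_succ_iff_lt_or_eq.mp hlt with h | h
        · exact h
        · exfalso
          have htin := (pvConn_props g r c s t hC).1
          have : t = pvDec c k := by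
            rw [← pvDec_idx r c t htin, h]
          rw [this] at hC
          have := (pvConn_props g r c s _ hC).2
          rw [hz] at this
          exact hC.2.1 this.symm
    · exact hreps.1.trans (by rw [hbase]; exact List.sublist_append_left _ _)
    · intro x hx hnz
      rcases Nat.lt_succ_iff_lt_or_eq.mp hx with hx' | rfl
      · exact hreps.2.2 x hx' hnz
      · exact absurd hz hnz
  · -- nonzero cell: appended to its component's bucket
    have hbody : pvBodyB g r c par d (pvDec c k) =
        d.insert (ufFind par (r * c + 1) (pvIdx c (pvDec c k)))
          (d.getD (ufFind par (r * c + 1) (pvIdx c (pvDec c k))) [] ++ [pvDec c k]) := by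
      unfold pvBodyB
      rw [if_pos hz]
      rfl
    rw [hbody]
    set K := ufFind par (r * c + 1) (pvIdx c (pvDec c k)) with hK
    by_cases hex : ∃ s ∈ reps, pvConn g r c s (pvDec c k)
    · obtain ⟨s, hs, hconn⟩ := hex
      have hRepS : pvRepP g r c s := hreps.2.1 s hs
      have hKs : ufFind par (r * c + 1) (pvIdx c s) = K :=
        pvConn_find_eq g r c par hU s (pvDec c k) hconn
      obtain ⟨kv, hkvmem, hkvR⟩ := pvForall₂_mem_right _ hf2 s hs
      have hkv1 : kv.1 = K := by rw [hkvR.1, hKs]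
      have hKmem : K ∈ d.keys := by
        show K ∈ d.items.map Prod.fst
        exact List.mem_map.mpr ⟨kv, hkvmem, hkv1⟩
      have hcont : d.contains K = true := (PySem.Dict.contains_iff_mem_keys d K).mpr hKmem
      refine ⟨reps, ?_, ?_, ?_, hreps.2.1, ?_⟩
      · -- the items are updated in place
        rw [PySem.Dict.items_insert_of_contains d _ hcont, List.forall₂_map_left_iff]
        refine pvForall₂_imp_mem _ _ hf2 ?_
        intro kv' s' hkv'mem hs'mem hR'
        have hRepS' : pvRepP g r c s' := hreps.2.1 s' hs'mem
        by_cases hq : kv'.1 = K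
        · have hconnS' : pvConn g r c s' (pvDec c k) := by
            apply pvFind_eq_conn g r c par hUF s' (pvDec c k) hRepS'.1 hin hRepS'.2.1 hz
            rw [← hR'.1, hq, hK]
          have hgetD : d.getD K [] = kv'.2 := by
            have : (K, kv'.2) ∈ d.items := by
              have : kv' = (K, kv'.2) := Prod.ext hq rfl
              rwa [← this]
            exact PySem.Dict.getD_of_mem_items d this hknd []
          rw [if_pos (by simpa using hq)]
          refine ⟨by show K = _; rw [← hq]; exact hR'.1, ?_, ?_⟩
          · rw [hgetD]
            refine pvNodup_snoc _ _ hR'.2.1 ?_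
            intro hcon
            have := (hR'.2.2 _).mp hcon
            omega
          · intro t
            rw [hgetD]
            simp only [List.mem_append, List.mem_singleton]
            rw [hR'.2.2 t]
            constructor
            · rintro (⟨hlt, hC⟩ | rfl)
              · exact ⟨by omega, hC⟩
              · exact ⟨by omega, hconnS'⟩
            · rintro ⟨hlt, hC⟩
              rcases Nat.lt_succ_iff_lt_or_eq.mp hlt with h | h
              · exact Or.inl ⟨h, hC⟩
              · right
                have htin := (pvConn_props g r c s' t hC).1
                rw [← pvDec_idx r c t htin, h]
        · rw [if_neg (by simpa using hq)]
          refine ⟨hR'.1, hR'.2.1, ?_⟩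
          intro t
          rw [hR'.2.2 t]
          constructor
          · rintro ⟨hlt, hC⟩
            exact ⟨by omega, hC⟩
          · rintro ⟨hlt, hC⟩
            rcases Nat.lt_succ_iff_lt_or_eq.mp hlt with h | h
            · exact ⟨h, hC⟩
            · exfalso
              have htin := (pvConn_props g r c s' t hC).1
              have hteq : t = pvDec c k := by rw [← pvDec_idx r c t htin, h]
              rw [hteq] at hC
              apply hq
              rw [hR'.1]
              exact pvConn_find_eq g r c par hU s' (pvDec c k) hC
      · rw [PySem.Dict.keys_insert_of_contains d _ hcont]
        exact hknd
      · exact hreps.1.trans (by rw [hbase]; exact List.sublist_append_left _ _)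
      · intro x hx hnz
        rcases Nat.lt_succ_iff_lt_or_eq.mp hx with hx' | rfl
        · exact hreps.2.2 x hx' hnz
        · exact ⟨s, hs, hconn⟩
    · -- a brand-new component bucket
      have hrep : pvRepP g r c (pvDec c k) := pvFreshRep g r c k reps hk hc hreps.2.2 hz hex
      have hncont : d.contains K = false := by
        by_contra hcon
        have hcont : d.contains K = true := by
          cases h : d.contains K
          · exact absurd h hcon
          · rfl
        have hKmem := (PySem.Dict.contains_iff_mem_keys d K).mp hcont
        obtain ⟨kv, hkvmem, hkv1⟩ := List.mem_map.mp hKmem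
        obtain ⟨s', hs'mem, hR'⟩ := pvForall₂_mem_left _ hf2 kv hkvmem
        have hRepS' : pvRepP g r c s' := hreps.2.1 s' hs'mem
        refine hex ⟨s', hs'mem, ?_⟩
        apply pvFind_eq_conn g r c par hUF s' (pvDec c k) hRepS'.1 hin hRepS'.2.1 hz
        rw [← hR'.1, hkv1, hK]
      have hgetD : d.getD K [] = [] := PySem.Dict.getD_of_not_contains d [] hncont
      refine ⟨reps ++ [pvDec c k], ?_, ?_, ?_, ?_, ?_⟩
      · rw [PySem.Dict.items_insert_of_not_contains d _ hncont]
        refine pvForall₂_append _ ?_ (List.Forall₂.cons ?_ List.Forall₂.nil)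
        · refine pvForall₂_imp_mem _ _ hf2 ?_
          intro kv' s' hkv'mem hs'mem hR'
          refine ⟨hR'.1, hR'.2.1, ?_⟩
          intro t
          rw [hR'.2.2 t]
          constructor
          · rintro ⟨hlt, hC⟩
            exact ⟨by omega, hC⟩
          · rintro ⟨hlt, hC⟩
            rcases Nat.lt_succ_iff_lt_or_eq.mp hlt with h | h
            · exact ⟨h, hC⟩
            · exfalso
              have htin := (pvConn_props g r c s' t hC).1
              have hteq : t = pvDec c k := by rw [← pvDec_idx r c t htin, h]
              rw [hteq] at hC
              exact hex ⟨s', hs'mem, hC⟩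
        · refine ⟨rfl, ?_, ?_⟩
          · rw [hgetD]
            simp
          · intro t
            rw [hgetD]
            simp only [List.nil_append, List.mem_singleton]
            constructor
            · rintro rfl
              exact ⟨by omega, pvConn_refl g r c (pvDec c k) hin hz⟩
            · rintro ⟨hlt, hC⟩
              have htin := (pvConn_props g r c _ t hC).1
              have htnz : pvAt g t ≠ 0 := by
                have := (pvConn_props g r c _ t hC).2
                rw [this]
                exact hz
              rcases Nat.lt_succ_iff_lt_or_eq.mp hlt with h | h
              · exfalso
                obtain ⟨s'', hs''mem, hC''⟩ := hreps.2.2 (pvIdx c t) h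
                  (by rw [pvDec_idx r c t htin]; exact htnz)
                rw [pvDec_idx r c t htin] at hC''
                exact hex ⟨s'', hs''mem, pvConn_trans g r c s'' t (pvDec c k) hC''
                  (pvConn_symm g r c (pvDec c k) t hC)⟩
              · rw [← pvDec_idx r c t htin, h]
      · exact PySem.Dict.nodup_keys_insert d K _ hknd
      · rw [hbase]
        exact List.Sublist.append hreps.1 (List.Sublist.refl _)
      · intro s' hs'
        rcases List.mem_append.mp hs' with hs' | hs'
        · exact hreps.2.1 s' hs'
        · have : s' = pvDec c k := by simpa using hs'
          subst this
          exact hrep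
      · intro x hx hnz
        rcases Nat.lt_succ_iff_lt_or_eq.mp hx with hx' | rfl
        · obtain ⟨s', hs', hC⟩ := hreps.2.2 x hx' hnz
          exact ⟨s', List.mem_append.mpr (Or.inl hs'), hC⟩
        · exact ⟨pvDec c x, List.mem_append.mpr (Or.inr (by simp)),
            pvConn_refl g r c (pvDec c x) hin hnz⟩

lemma pvFoldB_run (g : List (List Int)) (r c : Nat) (hc : 0 < c)
    (par : List Nat) (hU : pvInvU g r c (r * c) par) :
    ∀ k, k ≤ r * c → ∃ reps, pvInvB g r c par k
      (((List.range k).map (pvDec c)).foldl (pvBodyB g r c par) PySem.Dict.empty) reps := by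
  intro k
  induction k with
  | zero =>
    intro _
    simp only [List.range_zero, List.map_nil, List.foldl_nil]
    refine ⟨[], ?_, ?_, ?_, ?_, ?_⟩
    · exact List.Forall₂.nil
    · show ([] : List Nat).Nodup
      exact List.nodup_nil
    · simp
    · simp
    · simp
  | succ k ih =>
    intro hk
    obtain ⟨reps, hinv⟩ := ih (by omega)
    rw [List.range_succ, List.map_append, List.foldl_append]
    exact pvStepB_inv g r c k (by omega) hc par hU _ reps hinv

-- ===== pairing the two result lists =====
lemma pvMin?_foldl {α β : Type} (R : α → β → Prop) (ka : α → Nat) (kb : β → Nat)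
    (hk : ∀ a b, R a b → ka a = kb b) :
    ∀ {l1 : List α} {l2 : List β}, List.Forall₂ R l1 l2 →
      ∀ (acc1 : Option α) (acc2 : Option β),
      ((acc1 = none ∧ acc2 = none) ∨ (∃ a b, acc1 = some a ∧ acc2 = some b ∧ R a b)) →
      ((l1.foldl (fun acc x => match acc with
          | none => some x
          | some m => if ka x < ka m then some x else some m) acc1 = none ∧
        l2.foldl (fun acc y => match acc with
          | none => some y
          | some m => if kb y < kb m then some y else some m) acc2 = none) ∨
       (∃ a b, l1.foldl (fun acc x => match acc with
          | none => some x
          | some m => if ka x < ka m then some x else some m) acc1 = some a ∧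
        l2.foldl (fun acc y => match acc with
          | none => some y
          | some m => if kb y < kb m then some y else some m) acc2 = some b ∧ R a b)) := by
  intro l1 l2 h
  induction h with
  | nil =>
    intro acc1 acc2 hacc
    simpa using hacc
  | @cons x y l1' l2' hxy htl ih =>
    intro acc1 acc2 hacc
    rcases hacc with ⟨rfl, rfl⟩ | ⟨a, b, rfl, rfl, hab⟩
    · simp only [List.foldl_cons]
      exact ih (some x) (some y) (Or.inr ⟨x, y, rfl, rfl, hxy⟩)
    · simp only [List.foldl_cons]
      have hkey := hk a b hab
      have hkey2 := hk x y hxy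
      by_cases hlt : ka x < ka a
      · have hlt2 : kb y < kb b := by rw [← hkey2, ← hkey]; exact hlt
        rw [if_pos hlt, if_pos hlt2]
        exact ih (some x) (some y) (Or.inr ⟨x, y, rfl, rfl, hxy⟩)
      · have hlt2 : ¬ kb y < kb b := by rw [← hkey2, ← hkey]; exact hlt
        rw [if_neg hlt, if_neg hlt2]
        exact ih (some a) (some b) (Or.inr ⟨a, b, rfl, rfl, hab⟩)

lemma pvMin?_forall₂ {α β : Type} (R : α → β → Prop) (ka : α → Nat) (kb : β → Nat)
    (hk : ∀ a b, R a b → ka a = kb b) :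
    ∀ {l1 : List α} {l2 : List β}, List.Forall₂ R l1 l2 →
      (PySem.List.min? l1 ka = none ∧ PySem.List.min? l2 kb = none) ∨
      (∃ a b, PySem.List.min? l1 ka = some a ∧ PySem.List.min? l2 kb = some b ∧ R a b) := by
  intro l1 l2 h
  exact pvMin?_foldl R ka kb hk h none none (Or.inl ⟨rfl, rfl⟩)

-- ===== the main equality =====
lemma pvMain (g : List (List Int)) :
    extract_smallest_object g = extract_smallest_object_alt g := by
  cases g with
  | nil => rfl
  | cons g0 gs =>
    by_cases hg0 : g0 = []
    · subst hg0
      rfl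
    · have hc : 0 < g0.length := List.length_pos_of_ne_nil hg0
      set r : Nat := (g0 :: gs).length with hrdef
      set c : Nat := g0.length with hcdef
      have eFind : pvFindObjects (g0 :: gs) =
          (((List.range (r * c)).map (pvDec c)).foldl (pvBodyA (g0 :: gs) r c)
            (List.replicate r (List.replicate c false), [])).2 := by
        simp only [pvFindObjects]
        rw [if_neg hg0, pvCoords_eq]
      have eB : extract_smallest_object_alt (g0 :: gs) =
          (match PySem.List.min?
              ((((List.range (r * c)).map (pvDec c)).foldl
                (pvBodyB (g0 :: gs) r c
                  (((List.range (r * c)).map (pvDec c)).foldl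
                    (fun par p => pvUnionCell (g0 :: gs) r c par p) (List.range (r * c))))
                PySem.Dict.empty).values) (fun l => l.length) with
           | none => (g0 :: gs).map (fun row => row)
           | some smallest => pvCrop (g0 :: gs) smallest) := by
        simp only [extract_smallest_object_alt]
        rw [if_neg hg0, pvCoords_eq]
      set par : List Nat := ((List.range (r * c)).map (pvDec c)).foldl
        (fun par p => pvUnionCell (g0 :: gs) r c par p) (List.range (r * c)) with hpar
      set d : PySem.Dict Nat (List (Int × Int)) :=
        ((List.range (r * c)).map (pvDec c)).foldl (pvBodyB (g0 :: gs) r c par)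
          PySem.Dict.empty with hd
      set stA : List (List Bool) × List (List (Int × Int)) :=
        ((List.range (r * c)).map (pvDec c)).foldl (pvBodyA (g0 :: gs) r c)
          (List.replicate r (List.replicate c false), []) with hstA
      obtain ⟨repsA, hA⟩ := pvFoldA_run (g0 :: gs) r c hc (r * c) le_rfl
      have hU := pvFoldU_run (g0 :: gs) r c hc
      obtain ⟨repsB, hB⟩ := pvFoldB_run (g0 :: gs) r c hc par hU (r * c) le_rfl
      have hre : repsA = repsB := pvRepsOf_unique (g0 :: gs) r c (r * c) le_rfl hc repsA repsB
        hA.2.2.2 hB.2.2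
      rw [← hre] at hB
      -- pair A's object lists with B's bucket lists through the common representatives
      have hf2A : List.Forall₂ (fun o s => (o.Nodup ∧ ∀ t, t ∈ o ↔ pvConn (g0 :: gs) r c s t) ∧
          pvRepP (g0 :: gs) r c s) stA.2 repsA :=
        pvForall₂_imp_mem _ _ hA.2.2.1 (fun o s _ hs hR => ⟨hR, hA.2.2.2.2.1 s hs⟩)
      have hf2B : List.Forall₂ (fun l s => l.Nodup ∧
          ∀ t, t ∈ l ↔ (pvIdx c t < r * c ∧ pvConn (g0 :: gs) r c s t)) d.values repsA := by
        show List.Forall₂ _ (d.items.map Prod.snd) repsA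
        rw [List.forall₂_map_left_iff]
        exact List.Forall₂.imp (fun kv s hR => ⟨hR.2.1, hR.2.2⟩) hB.1
      have hpair := pvForall₂_comp _ _ hf2A hf2B
      have hklen : ∀ (o l : List (Int × Int)),
          (∃ s, ((o.Nodup ∧ ∀ t, t ∈ o ↔ pvConn (g0 :: gs) r c s t) ∧
            pvRepP (g0 :: gs) r c s) ∧
           (l.Nodup ∧ ∀ t, t ∈ l ↔ (pvIdx c t < r * c ∧ pvConn (g0 :: gs) r c s t))) →
          o.length = l.length := by
        rintro o l ⟨s, ⟨⟨hnd, hiff⟩, _⟩, hndl, hiffl⟩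
        refine pvLen_eq o l hnd hndl ?_
        intro t
        rw [hiff t, hiffl t]
        constructor
        · intro hC
          exact ⟨pvIdx_lt r c t (pvConn_props (g0 :: gs) r c s t hC).1, hC⟩
        · exact fun h => h.2
      have hmin := pvMin?_forall₂ _ (fun o => o.length) (fun l => l.length) hklen hpair
      rw [eB]
      simp only [extract_smallest_object]
      rw [eFind]
      rcases hmin with ⟨hnA, hnB⟩ | ⟨a, b, hsomeA, hsomeB, hS⟩
      · have h1 : stA.2 = [] := by rwa [PySem.List.min?_eq_none_iff] at hnA
        rw [h1, hnB]
      · have hane : stA.2 ≠ [] := by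
          intro hc0
          rw [hc0] at hsomeA
          rw [show (PySem.List.min? ([] : List (List (Int × Int))) (fun o => o.length)) = none from
            by rw [PySem.List.min?_eq_none_iff]] at hsomeA
          exact Option.some_ne_none a hsomeA.symm
        obtain ⟨o, os, ho⟩ := List.exists_cons_of_ne_nil hane
        rw [ho] at hsomeA
        rw [ho, hsomeB]
        show pvCrop (g0 :: gs) ((PySem.List.min? (o :: os) (fun x => x.length)).getD []) =
          pvCrop (g0 :: gs) b
        rw [hsomeA, Option.getD_some]
        obtain ⟨s, ⟨⟨hndA, hiffA⟩, hrepS⟩, hndB, hiffB⟩ := hS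
        apply pvCrop_ext
        · intro t
          rw [hiffA t, hiffB t]
          constructor
          · intro hC
            exact ⟨pvIdx_lt r c t (pvConn_props (g0 :: gs) r c s t hC).1, hC⟩
          · exact fun h => h.2
        · exact List.ne_nil_of_mem ((hiffA s).mpr
            (pvConn_refl (g0 :: gs) r c s hrepS.1 hrepS.2.1))

-- ===== VERDICT (by name: the statement is the Claim_ definition above) =====
theorem extract_smallest_object_spec : Claim_equal_extract_smallest_object := by
  intro g _ _
  unfold Spec_extract_smallest_object
  exact pvMain g
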